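-- pv_equiv track=rewrite | github.com/KarolinaPSouza/dataset-pesquisa | 1192-Counting_Rooms/14131532.py | count_rooms_2d_visited
-- ===== SOURCE A (Python) =====
-- def count_rooms_2d_visited(graph, x, y):
--     """
--     Counts rooms by performing a single-pass DFS using a 2D list for visited cells.
--     """
--     # A 2D list to keep track of visited coordinates (row, col)
--     # Initialize all cells as not visited (False)
--     visited = [[False for _ in range(y)] for _ in range(x)]
--     room_count = 0
--
--     # Define directions for movement (Up, Down, Left, Right)
--     directions = [(-1, 0), (1, 0), (0, -1), (0, 1)]
--
--     # Iterate through every cell in the grid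
--     for r in range(x):
--         for c in range(y):
--             # If we find a traversable space '.' that we haven't visited,
--             # it means we've discovered a new room.
--             if graph[r][c] == '.' and not visited[r][c]:
--                 room_count += 1
--
--                 # Start a DFS to find all connected parts of this room
--                 stack = [(r, c)]
--                 visited[r][c] = True
--
--                 while stack:
--                     curr_r, curr_c = stack.pop()
--
--                     # Explore neighbors in all four directions
--                     for dr, dc in directions:
--                         next_r, next_c = curr_r + dr, curr_c + dc
--
--                         # Check if the neighbor is within bounds, is a valid path,
--                         # and has not been visited yet
--                         if 0 <= next_r < x and 0 <= next_c < y and \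
--                            graph[next_r][next_c] == '.' and not visited[next_r][next_c]:
--
--                             visited[next_r][next_c] = True
--                             stack.append((next_r, next_c))
--
--     return room_count
-- ===== SOURCE B (Python) =====
-- def _find(parent, i):
--     while parent[i] != i:
--         i = parent[i]
--     return i
--
--
-- def _union(parent, a, b):
--     ra = _find(parent, a)
--     rb = _find(parent, b)
--     if ra != rb:
--         if ra < rb:
--             parent[rb] = ra
--         else:
--             parent[ra] = rb
--
--
-- def count_rooms_2d_visited(graph, x, y):
--     """
--     Counts rooms with a disjoint-set forest over flat cell ids (union by
--     minimum id); the number of rooms is the number of roots left at the end.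
--     """
--     parent = {}
--     for r in range(x):
--         for c in range(y):
--             if graph[r][c] == '.':
--                 i = r * y + c
--                 parent[i] = i
--                 if c > 0 and graph[r][c - 1] == '.':
--                     _union(parent, i, r * y + (c - 1))
--                 if r > 0 and graph[r - 1][c] == '.':
--                     _union(parent, i, (r - 1) * y + c)
--     return sum(1 for i in parent if parent[i] == i)
-- ===== Notes on version B (the rewrite author's own statement) =====
-- stated objective: alternative
-- what changed: Replaces the stack-based DFS flood fill over a 2D visited array with a disjoint-set forest over flat cell ids (union by minimum id on left/up neighbour edges), returning the number of roots left at the end.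
import Mathlib
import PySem

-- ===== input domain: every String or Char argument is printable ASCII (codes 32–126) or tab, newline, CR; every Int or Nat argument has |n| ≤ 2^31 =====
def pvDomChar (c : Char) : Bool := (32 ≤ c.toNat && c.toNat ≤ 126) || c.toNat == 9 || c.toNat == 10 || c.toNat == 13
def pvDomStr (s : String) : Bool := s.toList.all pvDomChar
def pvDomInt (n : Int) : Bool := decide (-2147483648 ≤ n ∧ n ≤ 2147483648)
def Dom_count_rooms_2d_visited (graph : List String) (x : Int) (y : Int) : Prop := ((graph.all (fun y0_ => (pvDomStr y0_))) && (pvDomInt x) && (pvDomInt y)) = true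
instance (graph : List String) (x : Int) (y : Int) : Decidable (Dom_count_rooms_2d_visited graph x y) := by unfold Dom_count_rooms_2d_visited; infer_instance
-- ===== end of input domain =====

-- B replaces A's DFS flood fill with a disjoint-set forest (union by minimum id)
-- over left/up edges; an alternative algorithm of similar cost, not claimed faster.


-- ===== PORT A =====
-- graph[r][c] as an Option (none = the IndexError excluded by Pre_)
def pvCell (graph : List String) (r c : Int) : Option Char :=
  match PySem.List.pyGet? graph r with
  | some s => PySem.Str.pyGet? s c
  | none => none

-- visited[r][c] lookup / assignment (total forms; every access A makes is in range)
def pvVGet (v : List (List Bool)) (r c : Int) : Bool :=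
  PySem.List.pyGetD (PySem.List.pyGetD v r []) c false

def pvVSet (v : List (List Bool)) (r c : Int) : List (List Bool) :=
  PySem.List.pySetD v r (PySem.List.pySetD (PySem.List.pyGetD v r []) c true)

-- directions = [(-1,0),(1,0),(0,-1),(0,1)]
def pvDirs : List (Int × Int) := [(-1, 0), (1, 0), (0, -1), (0, 1)]

-- one direction check of A's inner `for dr, dc in directions` loop
-- (the stack is stored top-first: append = cons, pop() = head)
def pvDfsStep (graph : List String) (x y : Int) (cur : Int × Int)
    (st : List (List Bool) × List (Int × Int)) (d : Int × Int) :
    List (List Bool) × List (Int × Int) :=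
  let nr := cur.1 + d.1
  let nc := cur.2 + d.2
  if 0 ≤ nr ∧ nr < x ∧ 0 ≤ nc ∧ nc < y ∧ pvCell graph nr nc = some '.' ∧
      pvVGet st.1 nr nc = false then
    (pvVSet st.1 nr nc, (nr, nc) :: st.2)
  else st

-- the `while stack:` loop (fuel only makes the recursion total; it never runs out
-- at the call below, see pvDfs_fuel lemmas)
def pvDfs (graph : List String) (x y : Int) :
    Nat → List (List Bool) → List (Int × Int) → List (List Bool)
  | _, v, [] => v
  | 0, v, _ :: _ => v
  | fuel + 1, v, cur :: rest =>
    let st := pvDirs.foldl (pvDfsStep graph x y cur) (v, rest)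
    pvDfs graph x y fuel st.1 st.2

def count_rooms_2d_visited (graph : List String) (x : Int) (y : Int) : Int :=
  let init := (PySem.List.pyRange 0 x 1).map
    (fun _ => (PySem.List.pyRange 0 y 1).map (fun _ => false))
  ((PySem.List.pyRange 0 x 1).foldl (fun st r =>
    (PySem.List.pyRange 0 y 1).foldl (fun (st : List (List Bool) × Int) c =>
      if pvCell graph r c = some '.' ∧ pvVGet st.1 r c = false then
        (pvDfs graph x y (2 * (x.toNat * y.toNat) + 2) (pvVSet st.1 r c) [(r, c)],
         st.2 + 1)
      else st) st) (init, (0 : Int))).2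

-- ===== PORT B =====
-- _find: follow parent pointers to the root (fuel makes it total; parent chains
-- strictly decrease, so i+1 steps always suffice)
def pvFind (parent : PySem.Dict Int Int) : Nat → Int → Int
  | 0, i => i
  | fuel + 1, i =>
    match parent.get? i with
    | some p => if p = i then i else pvFind parent fuel p
    | none => i

-- _union: link the larger root under the smaller
def pvUnion (parent : PySem.Dict Int Int) (a b : Int) : PySem.Dict Int Int :=
  let ra := pvFind parent (a.toNat + 1) a
  let rb := pvFind parent (b.toNat + 1) b
  if ra = rb then parent
  else if ra < rb then parent.insert rb ra else parent.insert ra rb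

def count_rooms_2d_visited_alt (graph : List String) (x : Int) (y : Int) : Int :=
  let parent := (PySem.List.pyRange 0 x 1).foldl (fun parent r =>
    (PySem.List.pyRange 0 y 1).foldl (fun (parent : PySem.Dict Int Int) c =>
      if pvCell graph r c = some '.' then
        let i := r * y + c
        let p1 := parent.insert i i
        let p2 := if 0 < c ∧ pvCell graph r (c - 1) = some '.' then
            pvUnion p1 i (r * y + (c - 1)) else p1
        if 0 < r ∧ pvCell graph (r - 1) c = some '.' then
            pvUnion p2 i ((r - 1) * y + c) else p2
      else parent) parent) PySem.Dict.empty
  parent.keys.foldl (fun acc k => if parent.get? k = some k then acc + 1 else acc) (0 : Int)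

-- ===== PRECONDITION & SPEC =====
-- Pre_ excludes exactly the inputs where A raises IndexError: with x > 0 and y > 0
-- the scan reads graph[r][c] for every 0 ≤ r < x, 0 ≤ c < y, so it needs at least
-- x rows of length at least y (B performs the same reads and raises there too).
def Pre_count_rooms_2d_visited (graph : List String) (x : Int) (y : Int) : Prop :=
  x ≤ 0 ∨ y ≤ 0 ∨
    (x ≤ (graph.length : Int) ∧ ∀ s ∈ graph.take x.toNat, y ≤ (s.toList.length : Int))
instance (graph : List String) (x : Int) (y : Int) :
    Decidable (Pre_count_rooms_2d_visited graph x y) := by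
  unfold Pre_count_rooms_2d_visited; infer_instance

def pvWitness_count_rooms_2d_visited : List String × Int × Int := (["..#", "#.."], 2, 3)

def Spec_count_rooms_2d_visited (graph : List String) (x : Int) (y : Int) (out : Int) : Prop := out = count_rooms_2d_visited_alt graph x y
instance (graph : List String) (x : Int) (y : Int) (out : Int) : Decidable (Spec_count_rooms_2d_visited graph x y out) := by unfold Spec_count_rooms_2d_visited; infer_instance

-- ===== CLAIM (what is proved, stated in full; the proofs are below) =====
def Claim_equal_count_rooms_2d_visited : Prop := ∀ (graph : List String) (x : Int) (y : Int), Dom_count_rooms_2d_visited graph x y → Pre_count_rooms_2d_visited graph x y → Spec_count_rooms_2d_visited graph x y (count_rooms_2d_visited graph x y)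

-- ===== LEMMAS AND PROOFS =====

-- ## Semantic layer: cells, adjacency, connectivity, scan order

def pvIP (p : ℕ × ℕ) : Int × Int := ((p.1 : Int), (p.2 : Int))

def pvInb (X Y : ℕ) (p : ℕ × ℕ) : Prop := p.1 < X ∧ p.2 < Y

def pvDot (graph : List String) (p : ℕ × ℕ) : Prop :=
  pvCell graph (p.1 : Int) (p.2 : Int) = some '.'

def pvNear (p q : ℕ × ℕ) : Prop :=
  (p.1 = q.1 ∧ (p.2 + 1 = q.2 ∨ q.2 + 1 = p.2)) ∨
  (p.2 = q.2 ∧ (p.1 + 1 = q.1 ∨ q.1 + 1 = p.1))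

def pvAdj (graph : List String) (X Y : ℕ) (p q : ℕ × ℕ) : Prop :=
  pvInb X Y p ∧ pvInb X Y q ∧ pvDot graph p ∧ pvDot graph q ∧ pvNear p q

def pvConn (graph : List String) (X Y : ℕ) : ℕ × ℕ → ℕ × ℕ → Prop :=
  Relation.ReflTransGen (pvAdj graph X Y)

def pvIdx (Y : ℕ) (p : ℕ × ℕ) : ℕ := p.1 * Y + p.2

-- the cells that are the scan-order (= index-order) minimum of their room:
-- BOTH programs return the number of such cells
def pvIsMin (graph : List String) (X Y : ℕ) (p : ℕ × ℕ) : Prop :=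
  pvInb X Y p ∧ pvDot graph p ∧ ∀ q, pvConn graph X Y p q → pvIdx Y p ≤ pvIdx Y q

noncomputable def pvIsMinB (graph : List String) (X Y : ℕ) (p : ℕ × ℕ) : Bool :=
  @decide _ (Classical.propDecidable (pvIsMin graph X Y p))

def pvBefore (r c : ℕ) (q : ℕ × ℕ) : Prop := q.1 < r ∨ (q.1 = r ∧ q.2 < c)

def pvScan (Y r c : ℕ) : List (ℕ × ℕ) :=
  (List.range r).flatMap (fun r' => (List.range Y).map (fun c' => (r', c'))) ++
    (List.range c).map (fun c' => (r, c'))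

lemma pvIP_inj {p q : ℕ × ℕ} (h : pvIP p = pvIP q) : p = q := by
  simp [pvIP, Prod.ext_iff] at h ⊢; omega

lemma pvNear_symm {p q : ℕ × ℕ} (h : pvNear p q) : pvNear q p := by
  unfold pvNear at *; omega

lemma pvAdj_symm {graph : List String} {X Y : ℕ} : Symmetric (pvAdj graph X Y) := by
  intro p q h
  obtain ⟨h1, h2, h3, h4, h5⟩ := h
  exact ⟨h2, h1, h4, h3, pvNear_symm h5⟩

lemma pvConn_symm {graph : List String} {X Y : ℕ} {p q : ℕ × ℕ}
    (h : pvConn graph X Y p q) : pvConn graph X Y q p :=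
  Relation.ReflTransGen.symmetric pvAdj_symm h

lemma pvConn_props {graph : List String} {X Y : ℕ} {p q : ℕ × ℕ}
    (h : pvConn graph X Y p q) :
    p = q ∨ (pvInb X Y p ∧ pvDot graph p ∧ pvInb X Y q ∧ pvDot graph q) := by
  induction h with
  | refl => exact Or.inl rfl
  | tail _ hstep ih =>
    rename_i b c
    right
    rcases ih with rfl | ⟨_, _, _, _⟩
    · exact ⟨hstep.1, hstep.2.2.1, hstep.2.1, hstep.2.2.2.1⟩
    · exact ⟨by assumption, by assumption, hstep.2.1, hstep.2.2.2.1⟩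

lemma pvIdx_inj {Y : ℕ} {p q : ℕ × ℕ} (hp : p.2 < Y) (hq : q.2 < Y)
    (h : pvIdx Y p = pvIdx Y q) : p = q := by
  unfold pvIdx at h
  have h1 : p.1 = q.1 := by
    rcases Nat.lt_trichotomy p.1 q.1 with hlt | he | hgt
    · exfalso; have : p.1 + 1 ≤ q.1 := hlt; nlinarith
    · exact he
    · exfalso; have : q.1 + 1 ≤ p.1 := hgt; nlinarith
  have : p.2 = q.2 := by rw [h1] at h; omega
  exact Prod.ext h1 this

lemma pvIdx_lt_of_before {Y r c : ℕ} {q : ℕ × ℕ} (hq : q.2 < Y)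
    (h : pvBefore r c q) : pvIdx Y q < r * Y + c := by
  unfold pvIdx
  rcases h with h | ⟨h1, h2⟩
  · have : q.1 * Y + Y ≤ r * Y := by
      have : (q.1 + 1) * Y ≤ r * Y := Nat.mul_le_mul_right Y h
      nlinarith
    omega
  · subst h1; omega

lemma pvScan_succ (Y r c : ℕ) : pvScan Y r (c + 1) = pvScan Y r c ++ [(r, c)] := by
  simp [pvScan, List.range_succ]

lemma pvScan_row (Y r : ℕ) : pvScan Y (r + 1) 0 = pvScan Y r Y := by
  simp [pvScan, List.range_succ]

lemma mem_pvScan {Y r c : ℕ} {q : ℕ × ℕ} :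
    q ∈ pvScan Y r c ↔ (q.1 < r ∧ q.2 < Y) ∨ (q.1 = r ∧ q.2 < c) := by
  cases q with
  | mk a b =>
    simp only [pvScan, List.mem_append, List.mem_flatMap, List.mem_map, List.mem_range,
      Prod.mk.injEq]
    constructor
    · rintro (⟨r', hr', c', hc', rfl, rfl⟩ | ⟨c', hc', rfl, rfl⟩)
      · exact Or.inl ⟨hr', hc'⟩
      · exact Or.inr ⟨rfl, hc'⟩
    · rintro (⟨ha, hb⟩ | ⟨rfl, hb⟩)
      · exact Or.inl ⟨a, ha, b, hb, rfl, rfl⟩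
      · exact Or.inr ⟨b, hb, rfl, rfl⟩

lemma pvBefore_iff_mem_scan {Y r c : ℕ} {q : ℕ × ℕ} (_hq : q.2 < Y) :
    pvBefore r c q ↔ q ∈ pvScan Y r c := by
  rw [mem_pvScan]; unfold pvBefore; omega

-- ## A-side: semantics of the visited 2D list

def pvSV (v : List (List Bool)) (p : ℕ × ℕ) : Prop :=
  pvVGet v (p.1 : Int) (p.2 : Int) = true

def pvShape (X Y : ℕ) (v : List (List Bool)) : Prop :=
  v.length = X ∧ ∀ row ∈ v, row.length = Y

def pvFalseCnt (v : List (List Bool)) : ℕ := (v.map (fun row => row.count false)).sum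

lemma pvVGet_nat (v : List (List Bool)) (a b : ℕ) :
    pvVGet v (a : Int) (b : Int) = ((v.getD a []).getD b false) := by
  simp [pvVGet]

lemma pvVSet_nat (v : List (List Bool)) (a b : ℕ) :
    pvVSet v (a : Int) (b : Int) = v.set a ((v.getD a []).set b true) := by
  simp [pvVSet]

lemma pvShape_set {X Y : ℕ} {v : List (List Bool)} {q : ℕ × ℕ}
    (hsh : pvShape X Y v) (hq : pvInb X Y q) :
    pvShape X Y (pvVSet v (q.1 : Int) (q.2 : Int)) := by
  rw [pvVSet_nat]
  obtain ⟨h1, h2⟩ := hsh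
  refine ⟨by simpa using h1, ?_⟩
  intro row hrow
  rcases List.mem_or_eq_of_mem_set hrow with h | rfl
  · exact h2 _ h
  · have hlt : q.1 < v.length := by have := hq.1; omega
    rw [List.getD_eq_getElem _ _ hlt]
    simpa using h2 _ (List.getElem_mem hlt)

lemma pvSV_set_iff {X Y : ℕ} {v : List (List Bool)} {q : ℕ × ℕ}
    (hsh : pvShape X Y v) (hq : pvInb X Y q) (p : ℕ × ℕ) :
    pvSV (pvVSet v (q.1 : Int) (q.2 : Int)) p ↔ p = q ∨ pvSV v p := by
  obtain ⟨h1, h2⟩ := hsh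
  obtain ⟨qa, qb⟩ := q
  obtain ⟨pa, pb⟩ := p
  obtain ⟨hqa, hqb⟩ := hq
  simp only at hqa hqb ⊢
  have hlt : qa < v.length := by omega
  have hrowD : v.getD qa [] = v[qa] := List.getD_eq_getElem _ _ hlt
  have hrlen : v[qa].length = Y := h2 _ (List.getElem_mem hlt)
  have hq2 : qb < v[qa].length := by omega
  unfold pvSV
  simp only
  rw [pvVSet_nat, pvVGet_nat, pvVGet_nat, hrowD]
  rw [List.getD_eq_getElem?_getD, List.getD_eq_getElem?_getD,
    List.getD_eq_getElem?_getD]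
  by_cases ha : pa = qa
  · subst ha
    rw [List.getElem?_set_self hlt]
    simp only [Option.getD_some]
    by_cases hb : pb = qb
    · subst hb
      rw [List.getElem?_set_self hq2]
      simp
    · rw [List.getElem?_set_ne (by omega), hrowD]
      simp only [Prod.mk.injEq]
      constructor
      · intro h; right; exact h
      · rintro (⟨_, h⟩ | h)
        · exact absurd h hb
        · exact h
  · rw [List.getElem?_set_ne (by omega)]
    simp only [Prod.mk.injEq]
    constructor
    · intro h; right; exact h
    · rintro (⟨h, _⟩ | h)
      · exact absurd h ha
      · exact h

lemma pvCountFalse_set {r : List Bool} {b : ℕ} (hb : r[b]? = some false) :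
    (r.set b true).count false + 1 = r.count false := by
  induction r generalizing b with
  | nil => simp at hb
  | cons a t ih =>
    cases b with
    | zero =>
      simp only [List.getElem?_cons_zero, Option.some.injEq] at hb
      subst hb
      simp
    | succ b' =>
      simp only [List.getElem?_cons_succ] at hb
      simp only [List.set_cons_succ, List.count_cons]
      have := ih hb
      omega

lemma pvFalseCnt_set_row {v : List (List Bool)} {a : ℕ} {row' : List Bool}
    (ha : a < v.length) :
    pvFalseCnt (v.set a row') + v[a].count false = pvFalseCnt v + row'.count false := by
  induction v generalizing a with
  | nil => simp at ha
  | cons r t ih =>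
    cases a with
    | zero => simp [pvFalseCnt]; omega
    | succ a' =>
      have ha' : a' < t.length := by simpa using ha
      have := ih ha'
      simp only [List.set_cons_succ, pvFalseCnt, List.map_cons, List.sum_cons,
        List.getElem_cons_succ] at *
      omega

lemma pvFalseCnt_set {X Y : ℕ} {v : List (List Bool)} {q : ℕ × ℕ}
    (hsh : pvShape X Y v) (hq : pvInb X Y q) (hun : ¬ pvSV v q) :
    pvFalseCnt (pvVSet v (q.1 : Int) (q.2 : Int)) + 1 = pvFalseCnt v := by
  obtain ⟨h1, h2⟩ := hsh
  have hlt : q.1 < v.length := by have := hq.1; omega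
  have hrowD : v.getD q.1 [] = v[q.1] := List.getD_eq_getElem _ _ hlt
  have hrlen : v[q.1].length = Y := h2 _ (List.getElem_mem hlt)
  have hq2 : q.2 < v[q.1].length := by rw [hrlen]; exact hq.2
  have hval : v[q.1][q.2]? = some false := by
    unfold pvSV at hun
    rw [pvVGet_nat, hrowD, List.getD_eq_getElem?_getD, List.getElem?_eq_getElem hq2] at hun
    simp only [Option.getD_some] at hun
    rw [List.getElem?_eq_getElem hq2]
    cases h : v[q.1][q.2] with
    | false => rfl
    | true => exact absurd h hun
  rw [pvVSet_nat, hrowD]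
  have h3 := pvFalseCnt_set_row (v := v) (a := q.1) (row' := v[q.1].set q.2 true) hlt
  have h4 := pvCountFalse_set hval
  omega

lemma pvSum_le_mul {l : List ℕ} {n : ℕ} (h : ∀ a ∈ l, a ≤ n) : l.sum ≤ l.length * n := by
  induction l with
  | nil => simp
  | cons a t ih =>
    simp only [List.sum_cons, List.length_cons]
    have h1 := ih (fun b hb => h b (List.mem_cons_of_mem _ hb))
    have h2 := h a (List.mem_cons_self ..)
    nlinarith

lemma pvFalseCnt_le {X Y : ℕ} {v : List (List Bool)} (hsh : pvShape X Y v) :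
    pvFalseCnt v ≤ X * Y := by
  obtain ⟨h1, h2⟩ := hsh
  have : ∀ a ∈ v.map (fun row => row.count false), a ≤ Y := by
    intro a ha
    rcases List.mem_map.mp ha with ⟨row, hrow, rfl⟩
    calc row.count false ≤ row.length := List.count_le_length
    _ = Y := h2 _ hrow
  have := pvSum_le_mul this
  simpa [pvFalseCnt, h1] using this

-- the initial all-False visited list
lemma pvInit_shape (x y : Int) :
    pvShape x.toNat y.toNat
      ((PySem.List.pyRange 0 x 1).map
        (fun _ => (PySem.List.pyRange 0 y 1).map (fun _ => false))) := by
  constructor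
  · simp [PySem.List.length_pyRange_one]
  · intro row hrow
    rcases List.mem_map.mp hrow with ⟨_, _, rfl⟩
    simp [PySem.List.length_pyRange_one]

lemma pvInit_sv (x y : Int) (p : ℕ × ℕ) :
    ¬ pvSV ((PySem.List.pyRange 0 x 1).map
      (fun _ => (PySem.List.pyRange 0 y 1).map (fun _ => false))) p := by
  unfold pvSV
  rw [pvVGet_nat]
  intro h
  set l := (PySem.List.pyRange 0 x 1).map
    (fun _ => (PySem.List.pyRange 0 y 1).map (fun _ => (false : Bool))) with hl
  have hrows : ∀ row ∈ l, row.getD p.2 false = false := by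
    intro row hrow
    rcases List.mem_map.mp hrow with ⟨_, _, rfl⟩
    rw [List.getD_eq_getElem?_getD, List.getElem?_map]
    cases h2 : (PySem.List.pyRange 0 y 1)[p.2]? <;> simp
  rcases Nat.lt_or_ge p.1 l.length with hlt | hge
  · have hz := hrows _ (List.getElem_mem hlt)
    rw [List.getD_eq_getElem _ _ hlt] at h
    rw [hz] at h
    cases h
  · rw [List.getD_eq_default _ _ hge] at h
    simp at h

-- ## A-side: invariants of the DFS (while-stack) loop

def pvStackOK (graph : List String) (X Y : ℕ) (s0 : ℕ × ℕ)
    (v : List (List Bool)) (s : List (Int × Int)) : Prop :=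
  ∀ e ∈ s, ∃ q : ℕ × ℕ, e = pvIP q ∧ pvSV v q ∧ pvInb X Y q ∧ pvDot graph q ∧
    pvConn graph X Y s0 q

def pvReachBd (graph : List String) (X Y : ℕ) (v0 : List (List Bool)) (s0 : ℕ × ℕ)
    (v : List (List Bool)) : Prop :=
  ∀ p, pvSV v p → pvSV v0 p ∨ pvConn graph X Y s0 p

def pvEx (graph : List String) (X Y : ℕ) (v : List (List Bool))
    (s : List (Int × Int)) : Prop :=
  ∀ p q, pvSV v p → pvAdj graph X Y p q → pvSV v q ∨ pvIP p ∈ s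

def pvMidEx (graph : List String) (X Y : ℕ) (un : ℕ × ℕ) (ds : List (Int × Int))
    (v : List (List Bool)) (s : List (Int × Int)) : Prop :=
  ∀ p q, pvSV v p → pvAdj graph X Y p q → pvSV v q ∨ pvIP p ∈ s ∨
    (p = un ∧ ∃ d ∈ ds, pvIP q = ((un.1 : Int) + d.1, (un.2 : Int) + d.2))

lemma pvDfsFold (graph : List String) (x y : Int) (X Y : ℕ)
    (hx : (X : Int) = x) (hy : (Y : Int) = y)
    (v0 : List (List Bool)) (s0 un : ℕ × ℕ)
    (hui : pvInb X Y un) (hud : pvDot graph un) (huc : pvConn graph X Y s0 un) :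
    ∀ (ds : List (Int × Int)), (∀ d ∈ ds, d ∈ pvDirs) →
    ∀ (v : List (List Bool)) (s : List (Int × Int)),
      pvShape X Y v → pvSV v un →
      pvStackOK graph X Y s0 v s → pvReachBd graph X Y v0 s0 v →
      pvMidEx graph X Y un ds v s →
      pvShape X Y (ds.foldl (pvDfsStep graph x y (pvIP un)) (v, s)).1 ∧
      pvStackOK graph X Y s0 (ds.foldl (pvDfsStep graph x y (pvIP un)) (v, s)).1
        (ds.foldl (pvDfsStep graph x y (pvIP un)) (v, s)).2 ∧
      pvReachBd graph X Y v0 s0 (ds.foldl (pvDfsStep graph x y (pvIP un)) (v, s)).1 ∧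
      pvMidEx graph X Y un [] (ds.foldl (pvDfsStep graph x y (pvIP un)) (v, s)).1
        (ds.foldl (pvDfsStep graph x y (pvIP un)) (v, s)).2 ∧
      (∀ p, pvSV v p → pvSV (ds.foldl (pvDfsStep graph x y (pvIP un)) (v, s)).1 p) ∧
      2 * pvFalseCnt (ds.foldl (pvDfsStep graph x y (pvIP un)) (v, s)).1 +
        (ds.foldl (pvDfsStep graph x y (pvIP un)) (v, s)).2.length ≤
        2 * pvFalseCnt v + s.length := by
  intro ds
  induction ds with
  | nil =>
    intro _ v s hsh hsvun hstk hreach hmid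
    exact ⟨hsh, hstk, hreach, hmid, fun p h => h, le_refl _⟩
  | cons d ds' ih =>
    intro hdirs v s hsh hsvun hstk hreach hmid
    have hd : d ∈ pvDirs := hdirs d (List.mem_cons_self ..)
    have hdirs' : ∀ d' ∈ ds', d' ∈ pvDirs := fun d' h => hdirs d' (List.mem_cons_of_mem _ h)
    rw [List.foldl_cons]
    set nr := (pvIP un).1 + d.1 with hnr
    set nc := (pvIP un).2 + d.2 with hnc
    by_cases hg : 0 ≤ nr ∧ nr < x ∧ 0 ≤ nc ∧ nc < y ∧ pvCell graph nr nc = some '.' ∧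
        pvVGet v nr nc = false
    · -- the neighbour is a fresh room cell: mark it and push it
      have hstep : pvDfsStep graph x y (pvIP un) (v, s) d =
          (pvVSet v nr nc, (nr, nc) :: s) := by
        simp only [pvDfsStep]
        rw [if_pos hg]
      obtain ⟨hg1, hg2, hg3, hg4, hg5, hg6⟩ := hg
      set w : ℕ × ℕ := (nr.toNat, nc.toNat) with hw
      have hwip : pvIP w = (nr, nc) := by
        simp [pvIP, hw, Int.toNat_of_nonneg hg1, Int.toNat_of_nonneg hg3]
      have hw1 : (w.1 : Int) = nr := by simp [hw, Int.toNat_of_nonneg hg1]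
      have hw2 : (w.2 : Int) = nc := by simp [hw, Int.toNat_of_nonneg hg3]
      have hwinb : pvInb X Y w := by
        constructor
        · have : nr < (X : Int) := by rw [hx]; exact hg2
          omega
        · have : nc < (Y : Int) := by rw [hy]; exact hg4
          omega
      have hwdot : pvDot graph w := by
        unfold pvDot
        rw [hw1, hw2]
        exact hg5
      have hwun : ¬ pvSV v w := by
        unfold pvSV
        rw [hw1, hw2, hg6]
        simp
      have hvset : pvVSet v nr nc = pvVSet v (w.1 : Int) (w.2 : Int) := by rw [hw1, hw2]
      have hnear : pvNear un w := by
        have e1 : (w.1 : Int) = (un.1 : Int) + d.1 := by rw [hw1, hnr]; rfl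
        have e2 : (w.2 : Int) = (un.2 : Int) + d.2 := by rw [hw2, hnc]; rfl
        have hd4 : d = (-1, 0) ∨ d = (1, 0) ∨ d = (0, -1) ∨ d = (0, 1) := by
          simpa [pvDirs] using hd
        unfold pvNear
        rcases hd4 with rfl | rfl | rfl | rfl <;> simp at e1 e2 <;> omega
      have hadj : pvAdj graph X Y un w := ⟨hui, hwinb, hud, hwdot, hnear⟩
      have hwc : pvConn graph X Y s0 w := huc.tail hadj
      have hsv' : ∀ p, pvSV (pvVSet v nr nc) p ↔ p = w ∨ pvSV v p := by
        intro p
        rw [hvset]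
        exact pvSV_set_iff hsh hwinb p
      rw [hstep]
      have hsh' : pvShape X Y (pvVSet v nr nc) := by rw [hvset]; exact pvShape_set hsh hwinb
      have hcnt : pvFalseCnt (pvVSet v nr nc) + 1 = pvFalseCnt v := by
        rw [hvset]; exact pvFalseCnt_set hsh hwinb hwun
      have hres := ih hdirs' (pvVSet v nr nc) ((nr, nc) :: s) hsh'
        ((hsv' un).mpr (Or.inr hsvun))
        (by -- stack ok
          intro e he
          rcases List.mem_cons.mp he with rfl | he'
          · exact ⟨w, hwip.symm, (hsv' w).mpr (Or.inl rfl), hwinb, hwdot, hwc⟩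
          · obtain ⟨q, rfl, hq1, hq2, hq3, hq4⟩ := hstk e he'
            exact ⟨q, rfl, (hsv' q).mpr (Or.inr hq1), hq2, hq3, hq4⟩)
        (by -- reach bound
          intro p hp
          rcases (hsv' p).mp hp with rfl | hp'
          · exact Or.inr hwc
          · exact hreach p hp')
        (by -- mid exemption
          intro p q hp hpq
          rcases (hsv' p).mp hp with rfl | hp'
          · exact Or.inr (Or.inl (by rw [hwip]; exact List.mem_cons_self ..))
          · rcases hmid p q hp' hpq with h | h | ⟨rfl, d', hd', hq⟩
            · exact Or.inl ((hsv' q).mpr (Or.inr h))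
            · exact Or.inr (Or.inl (List.mem_cons_of_mem _ h))
            · rcases List.mem_cons.mp hd' with rfl | hd''
              · -- this is the direction just processed: q = w is now visited
                have : q = w := pvIP_inj (by rw [hq, hwip]; rfl)
                exact Or.inl ((hsv' q).mpr (Or.inl this))
              · exact Or.inr (Or.inr ⟨rfl, d', hd'', hq⟩))
      refine ⟨hres.1, hres.2.1, hres.2.2.1, hres.2.2.2.1, ?_, ?_⟩
      · intro p hp
        exact hres.2.2.2.2.1 p ((hsv' p).mpr (Or.inr hp))
      · have := hres.2.2.2.2.2
        simp only [List.length_cons] at this ⊢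
        omega
    · -- nothing to do for this direction
      have hstep : pvDfsStep graph x y (pvIP un) (v, s) d = (v, s) := by
        simp only [pvDfsStep]
        rw [if_neg hg]
      rw [hstep]
      refine ih hdirs' v s hsh hsvun hstk hreach ?_
      intro p q hp hpq
      rcases hmid p q hp hpq with h | h | ⟨rfl, d', hd', hq⟩
      · exact Or.inl h
      · exact Or.inr (Or.inl h)
      · rcases List.mem_cons.mp hd' with rfl | hd''
        · -- guard failed although the neighbour is in bounds and a dot:
          -- it must already be visited
        
          have hq1 : (q.1 : Int) = nr := by
            have h' : (pvIP q).1 = nr := by rw [hq]; rfl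
            exact h'
          have hq2 : (q.2 : Int) = nc := by
            have h' : (pvIP q).2 = nc := by rw [hq]; rfl
            exact h'
          obtain ⟨_, hqinb, _, hqdot, _⟩ := hpq
          obtain ⟨hqX, hqY⟩ := hqinb
          have hXx : ((X : Int)) = x := hx
          have hYy : ((Y : Int)) = y := hy
          have hb1 : 0 ≤ nr := by omega
          have hb2 : nr < x := by omega
          have hb3 : 0 ≤ nc := by omega
          have hb4 : nc < y := by omega
          have hb5 : pvCell graph nr nc = some '.' := by
            rw [← hq1, ← hq2]; exact hqdot
          have hb6 : pvVGet v nr nc ≠ false := by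
            intro hfalse
            exact hg ⟨hb1, hb2, hb3, hb4, hb5, hfalse⟩
          have : pvSV v q := by
            unfold pvSV
            rw [hq1, hq2]
            cases h : pvVGet v nr nc with
            | false => exact absurd h hb6
            | true => rfl
          exact Or.inl this
        · exact Or.inr (Or.inr ⟨rfl, d', hd'', hq⟩)

lemma pvDfs_spec (graph : List String) (x y : Int) (X Y : ℕ)
    (hx : (X : Int) = x) (hy : (Y : Int) = y)
    (v0 : List (List Bool)) (s0 : ℕ × ℕ) :
    ∀ (fuel : ℕ) (v : List (List Bool)) (s : List (Int × Int)),
      pvShape X Y v → pvStackOK graph X Y s0 v s →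
      pvReachBd graph X Y v0 s0 v → pvEx graph X Y v s →
      2 * pvFalseCnt v + s.length < fuel →
      pvShape X Y (pvDfs graph x y fuel v s) ∧
      (∀ p, pvSV v p → pvSV (pvDfs graph x y fuel v s) p) ∧
      pvReachBd graph X Y v0 s0 (pvDfs graph x y fuel v s) ∧
      pvEx graph X Y (pvDfs graph x y fuel v s) [] := by
  intro fuel
  induction fuel with
  | zero =>
    intro v s _ _ _ _ hfuel
    exact absurd hfuel (Nat.not_lt_zero _)
  | succ fuel ih =>
    intro v s hsh hstk hreach hex hfuel
    cases s with
    | nil =>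
      refine ⟨hsh, fun p h => h, hreach, ?_⟩
      intro p q hp hpq
      rcases hex p q hp hpq with h | h
      · exact Or.inl h
      · simp at h
    | cons e rest =>
      obtain ⟨un, rfl, hsvun, hui, hud, huc⟩ := hstk e (List.mem_cons_self ..)
      have hstk' : pvStackOK graph X Y s0 v rest := fun e' he' =>
        hstk e' (List.mem_cons_of_mem _ he')
      have hmid : pvMidEx graph X Y un pvDirs v rest := by
        intro p q hp hpq
        rcases hex p q hp hpq with h | h
        · exact Or.inl h
        · rcases List.mem_cons.mp h with he | hrest
          · right; right
            have hpun : p = un := pvIP_inj he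
            subst hpun
            refine ⟨rfl, ?_⟩
            obtain ⟨_, _, _, _, hnear⟩ := hpq
            unfold pvNear at hnear
            rcases hnear with ⟨h1, h2 | h2⟩ | ⟨h1, h2 | h2⟩
            · exact ⟨(0, 1), by simp [pvDirs], by simp [pvIP, Prod.ext_iff]; omega⟩
            · exact ⟨(0, -1), by simp [pvDirs], by simp [pvIP, Prod.ext_iff]; omega⟩
            · exact ⟨(1, 0), by simp [pvDirs], by simp [pvIP, Prod.ext_iff]; omega⟩
            · exact ⟨(-1, 0), by simp [pvDirs], by simp [pvIP, Prod.ext_iff]; omega⟩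
          · exact Or.inr (Or.inl hrest)
      have hfold := pvDfsFold graph x y X Y hx hy v0 s0 un hui hud huc
        pvDirs (fun d h => h) v rest hsh hsvun hstk' hreach hmid
      have hdfs : pvDfs graph x y (fuel + 1) v (pvIP un :: rest) =
          pvDfs graph x y fuel
            (pvDirs.foldl (pvDfsStep graph x y (pvIP un)) (v, rest)).1
            (pvDirs.foldl (pvDfsStep graph x y (pvIP un)) (v, rest)).2 := by
        rfl
      rw [hdfs]
      set st := pvDirs.foldl (pvDfsStep graph x y (pvIP un)) (v, rest) with hst
      obtain ⟨hsh1, hstk1, hreach1, hmid1, hmono1, hmu1⟩ := hfold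
      have hex1 : pvEx graph X Y st.1 st.2 := by
        intro p q hp hpq
        rcases hmid1 p q hp hpq with h | h | ⟨_, _, h, _⟩
        · exact Or.inl h
        · exact Or.inr h
        · simp at h
      have hfuel1 : 2 * pvFalseCnt st.1 + st.2.length < fuel := by
        simp only [List.length_cons] at hfuel
        omega
      obtain ⟨c1, c2, c3, c4⟩ := ih st.1 st.2 hsh1 hstk1 hreach1 hex1 hfuel1
      exact ⟨c1, fun p hp => c2 p (hmono1 p hp), c3, c4⟩

-- ## A-side: the outer scan invariant

def pvVis (graph : List String) (X Y : ℕ) (r c : ℕ) (p : ℕ × ℕ) : Prop :=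
  ∃ q, pvInb X Y q ∧ pvDot graph q ∧ pvBefore r c q ∧ pvConn graph X Y q p

def pvOInv (graph : List String) (X Y : ℕ) (r c : ℕ)
    (st : List (List Bool) × Int) : Prop :=
  pvShape X Y st.1 ∧ (∀ p, pvSV st.1 p ↔ pvVis graph X Y r c p) ∧
  st.2 = ((pvScan Y r c).countP (pvIsMinB graph X Y) : Int)

lemma pvIsMinB_iff {graph : List String} {X Y : ℕ} {p : ℕ × ℕ} :
    pvIsMinB graph X Y p = true ↔ pvIsMin graph X Y p := by
  unfold pvIsMinB
  exact @decide_eq_true_iff _ (Classical.propDecidable _)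

lemma pvBefore_of_idx_lt {Y r c : ℕ} {q : ℕ × ℕ} (_hq : q.2 < Y)
    (h : pvIdx Y q < r * Y + c) (hc : c ≤ Y) : pvBefore r c q := by
  unfold pvIdx at h
  unfold pvBefore
  rcases Nat.lt_trichotomy q.1 r with h1 | h1 | h1
  · exact Or.inl h1
  · refine Or.inr ⟨h1, ?_⟩
    rw [h1] at h
    exact Nat.lt_of_add_lt_add_left h
  · exfalso
    have : (r + 1) * Y ≤ q.1 * Y := Nat.mul_le_mul_right Y h1
    nlinarith

set_option maxHeartbeats 1000000 in
lemma pvCellStep {graph : List String} {x y : Int} {X Y : ℕ}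
    (hx : (X : Int) = x) (hy : (Y : Int) = y) {r c : ℕ} (hr : r < X) (hc : c < Y)
    {st : List (List Bool) × Int} (hinv : pvOInv graph X Y r c st) :
    pvOInv graph X Y r (c + 1)
      (if pvCell graph (r : Int) (c : Int) = some '.' ∧
          pvVGet st.1 (r : Int) (c : Int) = false then
        (pvDfs graph x y (2 * (x.toNat * y.toNat) + 2)
          (pvVSet st.1 (r : Int) (c : Int)) [((r : Int), (c : Int))], st.2 + 1)
      else st) := by
  obtain ⟨hsh, hiff, hcnt⟩ := hinv
  have hpcinb : pvInb X Y (r, c) := ⟨hr, hc⟩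
  have hpcidx : pvIdx Y (r, c) = r * Y + c := rfl
  have hVmono : ∀ p, pvVis graph X Y r c p → pvVis graph X Y r (c + 1) p := by
    rintro p ⟨q, h1, h2, h3, h4⟩
    exact ⟨q, h1, h2, by unfold pvBefore at *; omega, h4⟩
  have hVnew : ∀ p, pvVis graph X Y r (c + 1) p →
      pvVis graph X Y r c p ∨ (pvDot graph (r, c) ∧ pvConn graph X Y (r, c) p) := by
    rintro p ⟨q, h1, h2, h3, h4⟩
    by_cases hq : pvBefore r c q
    · exact Or.inl ⟨q, h1, h2, hq, h4⟩
    · have he : q = (r, c) := by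
        unfold pvBefore at h3 hq
        obtain ⟨qa, qb⟩ := q
        simp only at h3 hq
        have h5 : qa = r ∧ qb = c := by omega
        simp [h5.1, h5.2]
      subst he
      exact Or.inr ⟨h2, h4⟩
  by_cases hdot : pvCell graph (r : Int) (c : Int) = some '.'
  · have hdotpc : pvDot graph (r, c) := hdot
    by_cases hvis : pvVGet st.1 (r : Int) (c : Int) = false
    · -- a new room is discovered
      rw [if_pos ⟨hdot, hvis⟩]
      have hunv : ¬ pvSV st.1 (r, c) := by
        unfold pvSV
        rw [hvis]
        simp
      -- invariants for the DFS call
      have hset : ∀ p, pvSV (pvVSet st.1 (r : Int) (c : Int)) p ↔ p = (r, c) ∨ pvSV st.1 p :=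
        fun p => pvSV_set_iff (X := X) (Y := Y) (v := st.1) (q := (r, c)) hsh hpcinb p
      have hclosed : ∀ p q, pvSV st.1 p → pvAdj graph X Y p q → pvSV st.1 q := by
        intro p q hp hpq
        obtain ⟨q', h1, h2, h3, h4⟩ := (hiff p).mp hp
        exact (hiff q).mpr ⟨q', h1, h2, h3, h4.tail hpq⟩
      have hdfs := pvDfs_spec graph x y X Y hx hy st.1 (r, c)
        (2 * (x.toNat * y.toNat) + 2)
        (pvVSet st.1 (r : Int) (c : Int)) [((r : Int), (c : Int))]
        (pvShape_set (X := X) (Y := Y) (v := st.1) (q := (r, c)) hsh hpcinb)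
        (by
          intro e he
          rcases List.mem_cons.mp he with rfl | h
          · exact ⟨(r, c), rfl, (hset (r, c)).mpr (Or.inl rfl), hpcinb, hdotpc,
              Relation.ReflTransGen.refl⟩
          · simp at h)
        (by
          intro p hp
          rcases (hset p).mp hp with rfl | hp'
          · exact Or.inr Relation.ReflTransGen.refl
          · exact Or.inl hp')
        (by
          intro p q hp hpq
          rcases (hset p).mp hp with rfl | hp'
          · exact Or.inr (List.mem_cons_self ..)
          · exact Or.inl ((hset q).mpr (Or.inr (hclosed p q hp' hpq))))
        (by
          have h1 : pvFalseCnt (pvVSet st.1 (r : Int) (c : Int)) + 1 = pvFalseCnt st.1 :=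
            pvFalseCnt_set (X := X) (Y := Y) (v := st.1) (q := (r, c)) hsh hpcinb hunv
          have h2 : pvFalseCnt st.1 ≤ X * Y := pvFalseCnt_le hsh
          have h3 : x.toNat = X := by omega
          have h4 : y.toNat = Y := by omega
          rw [h3, h4]
          simp only [List.length_cons, List.length_nil]
          omega)
      set v' := pvDfs graph x y (2 * (x.toNat * y.toNat) + 2)
        (pvVSet st.1 (r : Int) (c : Int)) [((r : Int), (c : Int))] with hv'
      obtain ⟨c1, c2, c3, c4⟩ := hdfs
      have hsvpc : pvSV v' (r, c) := c2 (r, c) ((hset (r, c)).mpr (Or.inl rfl))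
      have hconn_sv : ∀ p, pvConn graph X Y (r, c) p → pvSV v' p := by
        intro p hp
        induction hp with
        | refl => exact hsvpc
        | tail _ hstep ihp =>
          rcases c4 _ _ ihp hstep with h | h
          · exact h
          · simp at h
      -- (r, c) is the minimum of its (new) room
      have hmin : pvIsMin graph X Y (r, c) := by
        refine ⟨hpcinb, hdotpc, ?_⟩
        intro q hq
        by_contra hlt
        rw [not_le] at hlt
        have hqprops := pvConn_props hq
        rcases hqprops with rfl | ⟨_, _, hqinb, hqdot⟩
        · omega
        · have hqb : pvBefore r c q :=
            pvBefore_of_idx_lt hqinb.2 (by omega) (le_of_lt hc)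
          have : pvVis graph X Y r c (r, c) := ⟨q, hqinb, hqdot, hqb, pvConn_symm hq⟩
          exact hunv ((hiff (r, c)).mpr this)
      refine ⟨c1, ?_, ?_⟩
      · intro p
        simp only
        constructor
        · intro hp
          rcases c3 p hp with hp' | hp'
          · exact hVmono p ((hiff p).mp hp')
          · exact ⟨(r, c), hpcinb, hdotpc, by unfold pvBefore; right; omega, hp'⟩
        · intro hp
          rcases hVnew p hp with hp' | ⟨_, hp'⟩
          · exact c2 p ((hset p).mpr (Or.inr ((hiff p).mpr hp')))
          · exact hconn_sv p hp'
      · simp only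
        rw [hcnt, pvScan_succ, List.countP_append]
        simp [pvIsMinB_iff.mpr hmin]
    · -- already visited: an earlier room reaches this cell
      rw [if_neg (by tauto)]
      have hviss : pvSV st.1 (r, c) := by
        unfold pvSV
        cases h : pvVGet st.1 (r : Int) (c : Int) with
        | false => exact absurd h hvis
        | true => rfl
      obtain ⟨q0, hq1, hq2, hq3, hq4⟩ := (hiff (r, c)).mp hviss
      have hnotmin : ¬ pvIsMin graph X Y (r, c) := by
        rintro ⟨_, _, hmin⟩
        have := hmin q0 (pvConn_symm hq4)
        have := pvIdx_lt_of_before hq1.2 hq3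
        omega
      refine ⟨hsh, ?_, ?_⟩
      · intro p
        rw [hiff p]
        constructor
        · exact hVmono p
        · intro hp
          rcases hVnew p hp with hp' | ⟨_, hp'⟩
          · exact hp'
          · exact ⟨q0, hq1, hq2, hq3, hq4.trans hp'⟩
      · rw [hcnt, pvScan_succ, List.countP_append]
        have : pvIsMinB graph X Y (r, c) = false := by
          rw [← Bool.not_eq_true, pvIsMinB_iff]
          exact hnotmin
        simp [this]
  · -- a wall: nothing changes
    rw [if_neg (by tauto)]
    have hnotdot : ¬ pvDot graph (r, c) := hdot
    refine ⟨hsh, ?_, ?_⟩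
    · intro p
      rw [hiff p]
      constructor
      · exact hVmono p
      · intro hp
        rcases hVnew p hp with hp' | ⟨hd, _⟩
        · exact hp'
        · exact absurd hd hnotdot
    · rw [hcnt, pvScan_succ, List.countP_append]
      have : pvIsMinB graph X Y (r, c) = false := by
        rw [← Bool.not_eq_true, pvIsMinB_iff]
        rintro ⟨_, hd, _⟩
        exact hnotdot hd
      simp [this]

-- ## A-side: composing the scan loops

lemma pvRowEnd {graph : List String} {X Y : ℕ} {r : ℕ} {st : List (List Bool) × Int}
    (h : pvOInv graph X Y r Y st) : pvOInv graph X Y (r + 1) 0 st := by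
  obtain ⟨hsh, hiff, hcnt⟩ := h
  refine ⟨hsh, ?_, ?_⟩
  · intro p
    rw [hiff p]
    constructor
    · rintro ⟨q, h1, h2, h3, h4⟩
      exact ⟨q, h1, h2, by have := h1.2; unfold pvBefore at *; omega, h4⟩
    · rintro ⟨q, h1, h2, h3, h4⟩
      exact ⟨q, h1, h2, by have := h1.2; unfold pvBefore at *; omega, h4⟩
  · rw [hcnt, pvScan_row]

lemma pvInnerA (graph : List String) (x y : Int) (X Y : ℕ)
    (hx : (X : Int) = x) (hy : (Y : Int) = y) (r : ℕ) (hr : r < X) :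
    ∀ (n c0 : ℕ) (st : List (List Bool) × Int), c0 + n = Y →
      pvOInv graph X Y r c0 st →
      pvOInv graph X Y r Y ((PySem.List.pyRange (c0 : Int) y 1).foldl
        (fun (st : List (List Bool) × Int) c =>
          if pvCell graph (r : Int) c = some '.' ∧ pvVGet st.1 (r : Int) c = false then
            (pvDfs graph x y (2 * (x.toNat * y.toNat) + 2)
              (pvVSet st.1 (r : Int) c) [((r : Int), c)], st.2 + 1)
          else st) st) := by
  intro n
  induction n with
  | zero =>
    intro c0 st hc0 hinv
    have : PySem.List.pyRange (c0 : Int) y 1 = [] :=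
      PySem.List.pyRange_one_eq_nil (by omega)
    rw [this, List.foldl_nil]
    have : c0 = Y := by omega
    rwa [this] at hinv
  | succ n ih =>
    intro c0 st hc0 hinv
    have hc : c0 < Y := by omega
    have hcons : PySem.List.pyRange (c0 : Int) y 1 =
        (c0 : Int) :: PySem.List.pyRange ((c0 : Int) + 1) y 1 :=
      PySem.List.pyRange_one_cons (by omega)
    rw [hcons, List.foldl_cons]
    have hstep := pvCellStep (x := x) (y := y) hx hy hr hc hinv
    have hcast : ((c0 : Int) + 1) = ((c0 + 1 : ℕ) : Int) := by push_cast; ring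
    rw [hcast]
    exact ih (c0 + 1) _ (by omega) hstep

lemma pvOuterA (graph : List String) (x y : Int) (X Y : ℕ)
    (hx : (X : Int) = x) (hy : (Y : Int) = y) :
    ∀ (m r0 : ℕ) (st : List (List Bool) × Int), r0 + m = X →
      pvOInv graph X Y r0 0 st →
      pvOInv graph X Y X 0 ((PySem.List.pyRange (r0 : Int) x 1).foldl
        (fun (st : List (List Bool) × Int) r =>
          (PySem.List.pyRange 0 y 1).foldl
            (fun (st : List (List Bool) × Int) c =>
              if pvCell graph r c = some '.' ∧ pvVGet st.1 r c = false then
                (pvDfs graph x y (2 * (x.toNat * y.toNat) + 2)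
                  (pvVSet st.1 r c) [(r, c)], st.2 + 1)
              else st) st) st) := by
  intro m
  induction m with
  | zero =>
    intro r0 st hr0 hinv
    have : PySem.List.pyRange (r0 : Int) x 1 = [] :=
      PySem.List.pyRange_one_eq_nil (by omega)
    rw [this, List.foldl_nil]
    have : r0 = X := by omega
    rwa [this] at hinv
  | succ m ih =>
    intro r0 st hr0 hinv
    have hr : r0 < X := by omega
    have hcons : PySem.List.pyRange (r0 : Int) x 1 =
        (r0 : Int) :: PySem.List.pyRange ((r0 : Int) + 1) x 1 :=
      PySem.List.pyRange_one_cons (by omega)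
    rw [hcons, List.foldl_cons]
    have h0 : (0 : Int) = ((0 : ℕ) : Int) := by norm_num
    have hinner := pvInnerA graph x y X Y hx hy r0 hr Y 0 st (by omega) hinv
    rw [h0]
    have hrow := pvRowEnd hinner
    have hcast : ((r0 : Int) + 1) = ((r0 + 1 : ℕ) : Int) := by push_cast; ring
    rw [hcast]
    exact ih (r0 + 1) _ (by omega) hrow

-- A's return value, for non-negative x and y
lemma pvA_eq (graph : List String) (x y : Int) (X Y : ℕ)
    (hx : (X : Int) = x) (hy : (Y : Int) = y) :
    count_rooms_2d_visited graph x y =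
      (((pvScan Y X 0).countP (pvIsMinB graph X Y) : ℕ) : Int) := by
  unfold count_rooms_2d_visited
  have hXx : x.toNat = X := by omega
  have hYy : y.toNat = Y := by omega
  have hinit0 : pvOInv graph X Y 0 0
      (((PySem.List.pyRange 0 x 1).map
        (fun _ => (PySem.List.pyRange 0 y 1).map (fun _ => false))), (0 : Int)) := by
    refine ⟨by have := pvInit_shape x y; rwa [hXx, hYy] at this, ?_, ?_⟩
    · intro p
      simp only
      constructor
      · intro h
        exact absurd h (pvInit_sv x y p)
      · rintro ⟨q, _, _, h3, _⟩
        unfold pvBefore at h3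
        omega
    · simp [pvScan]
  have h0 : (0 : Int) = ((0 : ℕ) : Int) := by norm_num
  have := pvOuterA graph x y X Y hx hy X 0
    (((PySem.List.pyRange 0 x 1).map
      (fun _ => (PySem.List.pyRange 0 y 1).map (fun _ => false))), (0 : Int))
    (by omega) hinit0
  rw [h0]
  exact this.2.2

-- ## Generic reachability helpers

lemma pvRT_congr {α : Type} {s t : α → α → Prop} (h : ∀ a b, s a b ↔ t a b) {u v : α}
    (hr : Relation.ReflTransGen s u v) : Relation.ReflTransGen t u v :=
  Relation.ReflTransGen.mono (fun a b hab => (h a b).mp hab) hr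

-- ## B-side: union-find core lemmas

def pvRoot (parent : PySem.Dict Int Int) (k : Int) : Int :=
  pvFind parent (k.toNat + 1) k

lemma pvFind_fix {parent : PySem.Dict Int Int} {k : Int} {f : ℕ}
    (h : parent.get? k = some k) (hf : 0 < f) : pvFind parent f k = k := by
  cases f with
  | zero => omega
  | succ f' => simp [pvFind, h]

lemma pvFind_spec {parent : PySem.Dict Int Int}
    (hch : ∀ k v, parent.get? k = some v → 0 ≤ v ∧ v ≤ k ∧ parent.contains v = true) :
    ∀ (f : ℕ) (k : Int), parent.contains k = true → 0 ≤ k → k.toNat < f →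
      parent.get? (pvFind parent f k) = some (pvFind parent f k) ∧
      parent.contains (pvFind parent f k) = true ∧
      0 ≤ pvFind parent f k ∧ pvFind parent f k ≤ k := by
  intro f
  induction f with
  | zero => intro k hk h0 hf; omega
  | succ f' ih =>
    intro k hk h0 hf
    have hsome : (parent.get? k).isSome := by
      rw [← PySem.Dict.contains_eq_isSome_get?]
      exact hk
    cases hget : parent.get? k with
    | none => rw [hget] at hsome; simp at hsome
    | some v =>
      obtain ⟨hv0, hvk, hvc⟩ := hch k v hget
      by_cases hvk' : v = k
      · subst hvk'
        simp only [pvFind, hget]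
        exact ⟨hget, hk, hv0, le_refl _⟩
      · simp only [pvFind, hget, if_neg hvk']
        have hvlt : v < k := lt_of_le_of_ne hvk hvk'
        obtain ⟨c1, c2, c3, c4⟩ := ih v hvc hv0 (by omega)
        exact ⟨c1, c2, c3, by omega⟩

lemma pvRoot_spec {parent : PySem.Dict Int Int}
    (hch : ∀ k v, parent.get? k = some v → 0 ≤ v ∧ v ≤ k ∧ parent.contains v = true)
    {k : Int} (hk : parent.contains k = true) (h0 : 0 ≤ k) :
    parent.get? (pvRoot parent k) = some (pvRoot parent k) ∧
    parent.contains (pvRoot parent k) = true ∧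
    0 ≤ pvRoot parent k ∧ pvRoot parent k ≤ k :=
  pvFind_spec hch (k.toNat + 1) k hk h0 (by omega)

lemma pvFind_insert_fresh {parent : PySem.Dict Int Int} {i : Int}
    (hch : ∀ k v, parent.get? k = some v → 0 ≤ v ∧ v ≤ k ∧ parent.contains v = true)
    (hni : parent.contains i = false) :
    ∀ (f : ℕ) (k : Int), parent.contains k = true → 0 ≤ k → k.toNat < f →
      pvFind (parent.insert i i) f k = pvFind parent f k := by
  intro f
  induction f with
  | zero => intro k hk h0 hf; omega
  | succ f' ih =>
    intro k hk h0 hf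
    have hki : k ≠ i := by
      intro h
      rw [h] at hk
      rw [hk] at hni
      cases hni
    have hget' : (parent.insert i i).get? k = parent.get? k :=
      PySem.Dict.get?_insert_of_ne parent i hki
    cases hget : parent.get? k with
    | none =>
      rw [hget] at hget'
      simp only [pvFind, hget', hget]
    | some v =>
      rw [hget] at hget'
      simp only [pvFind, hget', hget]
      by_cases hvk : v = k
      · rw [if_pos hvk, if_pos hvk]
      · rw [if_neg hvk, if_neg hvk]
        obtain ⟨hv0, hvk2, hvc⟩ := hch k v hget
        exact ih v hvc hv0 (by omega)

lemma pvFind_link {parent : PySem.Dict Int Int} {ra rb : Int}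
    (hch : ∀ k v, parent.get? k = some v → 0 ≤ v ∧ v ≤ k ∧ parent.contains v = true)
    (hra : parent.get? ra = some ra) (hrb : parent.get? rb = some rb)
    (h0a : 0 ≤ ra) (hab : ra < rb) :
    ∀ (f : ℕ) (k : Int), parent.contains k = true → 0 ≤ k → k.toNat < f →
      pvFind (parent.insert rb ra) f k =
        (if pvFind parent f k = rb then ra else pvFind parent f k) := by
  intro f
  induction f with
  | zero => intro k hk h0 hf; omega
  | succ f' ih =>
    intro k hk h0 hf
    by_cases hkrb : k = rb
    · have hget' : (parent.insert rb ra).get? k = some ra := by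
        rw [hkrb]
        exact PySem.Dict.get?_insert_self parent rb ra
      have hget : parent.get? k = some rb := by
        rw [hkrb]
        exact hrb
      have hLHS : pvFind (parent.insert rb ra) (f' + 1) k =
          pvFind (parent.insert rb ra) f' ra := by
        simp only [pvFind, hget']
        rw [if_neg (by omega)]
      have hRHS : pvFind parent (f' + 1) k = k := by
        simp only [pvFind, hget]
        rw [if_pos hkrb.symm]
      rw [hLHS, hRHS, if_pos hkrb]
      have hgetra : (parent.insert rb ra).get? ra = some ra := by
        rw [PySem.Dict.get?_insert_of_ne parent ra (by omega)]
        exact hra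
      exact pvFind_fix hgetra (by omega)
    · have hget' : (parent.insert rb ra).get? k = parent.get? k :=
        PySem.Dict.get?_insert_of_ne parent ra hkrb
      cases hget : parent.get? k with
      | none =>
        rw [hget] at hget'
        simp only [pvFind, hget', hget]
        rw [if_neg hkrb]
      | some v =>
        rw [hget] at hget'
        simp only [pvFind, hget', hget]
        by_cases hvk : v = k
        · subst hvk
          rw [if_pos rfl, if_pos rfl, if_neg hkrb]
        · rw [if_neg hvk, if_neg hvk]
          obtain ⟨hv0, hvk2, hvc⟩ := hch k v hget
          exact ih v hvc hv0 (by omega)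

-- ## B-side: the union operation preserves the forest invariant

def pvUFinv (parent : PySem.Dict Int Int) (R : Int → Int → Prop) : Prop :=
  parent.keys.Nodup ∧
  (∀ k v, parent.get? k = some v →
    0 ≤ v ∧ v ≤ k ∧ parent.contains v = true ∧ R v k) ∧
  (∀ k, parent.contains k = true →
    R (pvRoot parent k) k ∧ ∀ j, R j k → pvRoot parent k ≤ j)

def pvRgood (parent : PySem.Dict Int Int) (R : Int → Int → Prop) : Prop :=
  (∀ j k, R j k → R k j) ∧
  (∀ i j k, R i j → R j k → R i k) ∧
  (∀ k, parent.contains k = true → R k k) ∧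
  (∀ j k, R j k → parent.contains j = true ∧ parent.contains k = true) ∧
  (∀ k, parent.contains k = true → 0 ≤ k)

lemma pvUFinv_chain {parent : PySem.Dict Int Int} {R : Int → Int → Prop}
    (hUF : pvUFinv parent R) :
    ∀ k v, parent.get? k = some v → 0 ≤ v ∧ v ≤ k ∧ parent.contains v = true :=
  fun k v h => ⟨(hUF.2.1 k v h).1, (hUF.2.1 k v h).2.1, (hUF.2.1 k v h).2.2.1⟩

lemma pvRoot_classinv {parent : PySem.Dict Int Int} {R : Int → Int → Prop}
    (hUF : pvUFinv parent R) (hR : pvRgood parent R) {u w : Int} (h : R u w) :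
    pvRoot parent u = pvRoot parent w := by
  obtain ⟨hsym, htr, hrefl, hdom, hkey0⟩ := hR
  obtain ⟨hu, hw⟩ := hdom u w h
  obtain ⟨hru, hru2⟩ := hUF.2.2 u hu
  obtain ⟨hrw, hrw2⟩ := hUF.2.2 w hw
  have h1 : R (pvRoot parent u) w := htr _ _ _ hru h
  have h2 : R (pvRoot parent w) u := htr _ _ _ hrw (hsym _ _ h)
  have := hrw2 _ h1
  have := hru2 _ h2
  omega

lemma pvContains_congr {d d' : PySem.Dict Int Int} (h : d.keys = d'.keys) (k : Int) :
    d.contains k = d'.contains k := by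
  rw [PySem.Dict.contains_eq_decide_mem_keys, PySem.Dict.contains_eq_decide_mem_keys, h]

lemma pvLinkAux {parent : PySem.Dict Int Int} {R : Int → Int → Prop}
    (hUF : pvUFinv parent R) (hR : pvRgood parent R)
    {u w : Int} (hu : parent.contains u = true) (hw : parent.contains w = true)
    (hlt : pvRoot parent u < pvRoot parent w)
    (R' : Int → Int → Prop)
    (hJ : ∀ j k, R' j k ↔ R j k ∨ (R j u ∧ R w k) ∨ (R j w ∧ R u k)) :
    pvUFinv (parent.insert (pvRoot parent w) (pvRoot parent u)) R' ∧
    (parent.insert (pvRoot parent w) (pvRoot parent u)).keys = parent.keys := by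
  obtain ⟨hnd, hK2, hroot⟩ := hUF
  obtain ⟨hsym, htr, hrefl, hdom, hkey0⟩ := hR
  have hch := pvUFinv_chain ⟨hnd, hK2, hroot⟩
  have h0u : 0 ≤ u := hkey0 u hu
  have h0w : 0 ≤ w := hkey0 w hw
  obtain ⟨hgru, hcru, h0ru, hleru⟩ := pvRoot_spec hch hu h0u
  obtain ⟨hgrw, hcrw, h0rw, hlerw⟩ := pvRoot_spec hch hw h0w
  have hRru : R (pvRoot parent u) u := (hroot u hu).1
  have hRrw : R (pvRoot parent w) w := (hroot w hw).1
  have hkeys : (parent.insert (pvRoot parent w) (pvRoot parent u)).keys = parent.keys :=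
    PySem.Dict.keys_insert_of_contains parent _ hcrw
  have hcont : ∀ k, (parent.insert (pvRoot parent w) (pvRoot parent u)).contains k =
      parent.contains k := pvContains_congr hkeys
  have hlink : ∀ k, parent.contains k = true → 0 ≤ k →
      pvRoot (parent.insert (pvRoot parent w) (pvRoot parent u)) k =
        (if pvRoot parent k = pvRoot parent w then pvRoot parent u
         else pvRoot parent k) := by
    intro k hk h0
    exact pvFind_link hch hgru hgrw h0ru hlt (k.toNat + 1) k hk h0 (by omega)
  -- the class of k under R determines its old root
  have hclass : ∀ k, R w k → pvRoot parent k = pvRoot parent w :=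
    fun k h => pvRoot_classinv ⟨hnd, hK2, hroot⟩ ⟨hsym, htr, hrefl, hdom, hkey0⟩
      (hsym _ _ h)
  have hclassu : ∀ k, R u k → pvRoot parent k = pvRoot parent u :=
    fun k h => pvRoot_classinv ⟨hnd, hK2, hroot⟩ ⟨hsym, htr, hrefl, hdom, hkey0⟩
      (hsym _ _ h)
  refine ⟨⟨PySem.Dict.nodup_keys_insert _ _ _ hnd, ?_, ?_⟩, hkeys⟩
  · -- entries
    intro k v hget
    rw [PySem.Dict.get?_insert] at hget
    by_cases hk : k = pvRoot parent w
    · rw [if_pos hk] at hget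
      have hveq : v = pvRoot parent u := (Option.some.inj hget).symm
      rw [hveq, hk]
      exact ⟨h0ru, by omega, by rw [hcont]; exact hcru,
        (hJ _ _).mpr (Or.inr (Or.inl ⟨hRru, hsym _ _ hRrw⟩))⟩
    · rw [if_neg hk] at hget
      obtain ⟨h1, h2, h3, h4⟩ := hK2 k v hget
      exact ⟨h1, h2, by rw [hcont]; exact h3, (hJ v k).mpr (Or.inl h4)⟩
  · -- roots
    intro k hk'
    have hk : parent.contains k = true := by rw [← hcont]; exact hk'
    have h0k : 0 ≤ k := hkey0 k hk
    rw [hlink k hk h0k]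
    by_cases hcase : pvRoot parent k = pvRoot parent w
    · rw [if_pos hcase]
      constructor
      · -- R' ru k
        refine (hJ _ k).mpr (Or.inr (Or.inl ⟨hRru, ?_⟩))
        have h1 : R (pvRoot parent k) k := (hroot k hk).1
        rw [hcase] at h1
        exact htr _ _ _ (hsym _ _ hRrw) h1
      · intro j hj
        rcases (hJ j k).mp hj with h | ⟨h1, h2⟩ | ⟨h1, h2⟩
        · have := (hroot k hk).2 j h
          omega
        · -- R j u: ru ≤ j
          exact (hroot u hu).2 j h1
        · -- R j w ∧ R u k: then root k = root u ≠ root w, contradiction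
          have := hclassu k h2
          omega
    · rw [if_neg hcase]
      constructor
      · exact (hJ _ k).mpr (Or.inl (hroot k hk).1)
      · intro j hj
        rcases (hJ j k).mp hj with h | ⟨h1, h2⟩ | ⟨h1, h2⟩
        · exact (hroot k hk).2 j h
        · -- R w k would force root k = root w
          have := hclass k h2
          omega
        · -- R j w: root w ≤ j, and root k = root u < root w
          have h3 := hclassu k h2
          have h4 := (hroot w hw).2 j h1
          omega

lemma pvUnion_spec {parent : PySem.Dict Int Int} {R : Int → Int → Prop}
    (hUF : pvUFinv parent R) (hR : pvRgood parent R)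
    {a b : Int} (ha : parent.contains a = true) (hb : parent.contains b = true)
    (R' : Int → Int → Prop)
    (hJ : ∀ j k, R' j k ↔ R j k ∨ (R j a ∧ R b k) ∨ (R j b ∧ R a k)) :
    pvUFinv (pvUnion parent a b) R' ∧ (pvUnion parent a b).keys = parent.keys := by
  obtain ⟨hsym, htr, hrefl, hdom, hkey0⟩ := hR
  have hunf : pvUnion parent a b =
      (if pvRoot parent a = pvRoot parent b then parent
       else if pvRoot parent a < pvRoot parent b then
         parent.insert (pvRoot parent b) (pvRoot parent a)
       else parent.insert (pvRoot parent a) (pvRoot parent b)) := rfl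
  by_cases he : pvRoot parent a = pvRoot parent b
  · rw [hunf, if_pos he]
    obtain ⟨hnd, hK2, hroot⟩ := hUF
    refine ⟨⟨hnd, ?_, ?_⟩, rfl⟩
    · intro k v hget
      obtain ⟨h1, h2, h3, h4⟩ := hK2 k v hget
      exact ⟨h1, h2, h3, (hJ v k).mpr (Or.inl h4)⟩
    · intro k hk
      refine ⟨(hJ _ k).mpr (Or.inl (hroot k hk).1), ?_⟩
      intro j hj
      rcases (hJ j k).mp hj with h | ⟨h1, h2⟩ | ⟨h1, h2⟩
      · exact (hroot k hk).2 j h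
      · have hcl : pvRoot parent k = pvRoot parent b :=
          pvRoot_classinv ⟨hnd, hK2, hroot⟩ ⟨hsym, htr, hrefl, hdom, hkey0⟩
            (hsym _ _ h2)
        have := (hroot a ha).2 j h1
        omega
      · have hcl : pvRoot parent k = pvRoot parent a :=
          pvRoot_classinv ⟨hnd, hK2, hroot⟩ ⟨hsym, htr, hrefl, hdom, hkey0⟩
            (hsym _ _ h2)
        have := (hroot b hb).2 j h1
        omega
  · by_cases hlt : pvRoot parent a < pvRoot parent b
    · rw [hunf, if_neg he, if_pos hlt]
      exact pvLinkAux hUF ⟨hsym, htr, hrefl, hdom, hkey0⟩ ha hb hlt R' hJ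
    · have hlt' : pvRoot parent b < pvRoot parent a := by
        rcases lt_trichotomy (pvRoot parent a) (pvRoot parent b) with h | h | h
        · exact absurd h hlt
        · exact absurd h he
        · exact h
      rw [hunf, if_neg he, if_neg hlt]
      refine pvLinkAux hUF ⟨hsym, htr, hrefl, hdom, hkey0⟩ hb ha hlt' R' ?_
      intro j k
      rw [hJ j k]
      tauto

-- ## B-side: the scan-stage connectivity relation

def pvSD (graph : List String) (X Y r c : ℕ) (p : ℕ × ℕ) : Prop :=
  pvInb X Y p ∧ pvDot graph p ∧ pvBefore r c p

def pvStepB (graph : List String) (X Y r c : ℕ) (p q : ℕ × ℕ) : Prop :=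
  pvAdj graph X Y p q ∧ pvBefore r c p ∧ pvBefore r c q

def pvRscan (graph : List String) (X Y r c : ℕ) (j k : Int) : Prop :=
  ∃ p q : ℕ × ℕ, j = (pvIdx Y p : Int) ∧ k = (pvIdx Y q : Int) ∧
    pvSD graph X Y r c p ∧ pvSD graph X Y r c q ∧
    Relation.ReflTransGen (pvStepB graph X Y r c) p q

def pvKeysSpec (graph : List String) (Y r c : ℕ) : List Int :=
  ((pvScan Y r c).filter
    (fun p => pvCell graph (p.1 : Int) (p.2 : Int) == some '.')).map
    (fun p => (pvIdx Y p : Int))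

lemma pvStepB_symm {graph : List String} {X Y r c : ℕ} :
    Symmetric (pvStepB graph X Y r c) := by
  rintro p q ⟨h1, h2, h3⟩
  exact ⟨pvAdj_symm h1, h3, h2⟩

lemma pvRscan_symm {graph : List String} {X Y r c : ℕ} {j k : Int}
    (h : pvRscan graph X Y r c j k) : pvRscan graph X Y r c k j := by
  obtain ⟨p, q, h1, h2, h3, h4, h5⟩ := h
  exact ⟨q, p, h2, h1, h4, h3, Relation.ReflTransGen.symmetric pvStepB_symm h5⟩

lemma pvRscan_trans {graph : List String} {X Y r c : ℕ} {i j k : Int}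
    (h : pvRscan graph X Y r c i j) (h' : pvRscan graph X Y r c j k) :
    pvRscan graph X Y r c i k := by
  obtain ⟨p, q, h1, h2, h3, h4, h5⟩ := h
  obtain ⟨p', q', h1', h2', h3', h4', h5'⟩ := h'
  have : q = p' := by
    apply pvIdx_inj h4.1.2 h3'.1.2
    omega
  subst this
  exact ⟨p, q', h1, h2', h3, h4', h5.trans h5'⟩

lemma mem_pvKeysSpec {graph : List String} {Y r c : ℕ} {k : Int} :
    k ∈ pvKeysSpec graph Y r c ↔
      ∃ p : ℕ × ℕ, k = (pvIdx Y p : Int) ∧ p ∈ pvScan Y r c ∧ pvDot graph p := by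
  unfold pvKeysSpec
  simp only [List.mem_map, List.mem_filter, beq_iff_eq]
  constructor
  · rintro ⟨p, ⟨h1, h2⟩, rfl⟩
    exact ⟨p, rfl, h1, h2⟩
  · rintro ⟨p, rfl, h1, h2⟩
    exact ⟨p, ⟨h1, h2⟩, rfl⟩

lemma pvScan_cell_inb {X Y r c : ℕ} (hr : r < X) (hc : c ≤ Y) :
    ∀ p ∈ pvScan Y r c, pvInb X Y p := by
  intro p hp
  rw [mem_pvScan] at hp
  unfold pvInb
  omega

lemma pvRgood_scan {graph : List String} {X Y r c : ℕ} {parent : PySem.Dict Int Int}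
    (hkeys : parent.keys = pvKeysSpec graph Y r c)
    (hscan : ∀ p ∈ pvScan Y r c, pvInb X Y p) :
    pvRgood parent (pvRscan graph X Y r c) := by
  have hcontains : ∀ k, parent.contains k = true ↔ k ∈ pvKeysSpec graph Y r c := by
    intro k
    rw [PySem.Dict.contains_iff_mem_keys, hkeys]
  refine ⟨fun j k h => pvRscan_symm h, fun i j k h h' => pvRscan_trans h h', ?_, ?_, ?_⟩
  · -- refl on keys
    intro k hk
    obtain ⟨p, rfl, h1, h2⟩ := mem_pvKeysSpec.mp ((hcontains k).mp hk)
    have hinb := hscan p h1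
    exact ⟨p, p, rfl, rfl, ⟨hinb, h2, (pvBefore_iff_mem_scan hinb.2).mpr h1⟩,
      ⟨hinb, h2, (pvBefore_iff_mem_scan hinb.2).mpr h1⟩, Relation.ReflTransGen.refl⟩
  · -- domain
    rintro j k ⟨p, q, rfl, rfl, h3, h4, _⟩
    constructor
    · rw [hcontains]
      exact mem_pvKeysSpec.mpr ⟨p, rfl, (pvBefore_iff_mem_scan h3.1.2).mp h3.2.2, h3.2.1⟩
    · rw [hcontains]
      exact mem_pvKeysSpec.mpr ⟨q, rfl, (pvBefore_iff_mem_scan h4.1.2).mp h4.2.2, h4.2.1⟩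
  · -- nonneg
    intro k hk
    obtain ⟨p, rfl, _, _⟩ := mem_pvKeysSpec.mp ((hcontains k).mp hk)
    positivity

lemma pvUFinv_congr {parent : PySem.Dict Int Int} {R R' : Int → Int → Prop}
    (h : ∀ j k, R j k ↔ R' j k) (hUF : pvUFinv parent R) : pvUFinv parent R' := by
  obtain ⟨h1, h2, h3⟩ := hUF
  refine ⟨h1, ?_, ?_⟩
  · intro k v hget
    obtain ⟨a, b, c, d⟩ := h2 k v hget
    exact ⟨a, b, c, (h v k).mp d⟩
  · intro k hk
    obtain ⟨a, b⟩ := h3 k hk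
    exact ⟨(h _ _).mp a, fun j hj => b j ((h j k).mpr hj)⟩

-- joining two classes keeps an equivalence-like relation equivalence-like
lemma pvJoin_good {R : Int → Int → Prop} {a b : Int}
    (hsym : ∀ j k, R j k → R k j) (htr : ∀ i j k, R i j → R j k → R i k)
    (_ha : R a a) (_hb : R b b) :
    (∀ j k, (fun j k => R j k ∨ (R j a ∧ R b k) ∨ (R j b ∧ R a k)) j k →
      (fun j k => R j k ∨ (R j a ∧ R b k) ∨ (R j b ∧ R a k)) k j) ∧
    (∀ i j k, (fun j k => R j k ∨ (R j a ∧ R b k) ∨ (R j b ∧ R a k)) i j →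
      (fun j k => R j k ∨ (R j a ∧ R b k) ∨ (R j b ∧ R a k)) j k →
      (fun j k => R j k ∨ (R j a ∧ R b k) ∨ (R j b ∧ R a k)) i k) := by
  constructor
  · rintro j k (h | ⟨h1, h2⟩ | ⟨h1, h2⟩)
    · exact Or.inl (hsym _ _ h)
    · exact Or.inr (Or.inr ⟨hsym _ _ h2, hsym _ _ h1⟩)
    · exact Or.inr (Or.inl ⟨hsym _ _ h2, hsym _ _ h1⟩)
  · rintro i j k (h | ⟨h1, h2⟩ | ⟨h1, h2⟩) (h' | ⟨h1', h2'⟩ | ⟨h1', h2'⟩)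
    · exact Or.inl (htr _ _ _ h h')
    · exact Or.inr (Or.inl ⟨htr _ _ _ h h1', h2'⟩)
    · exact Or.inr (Or.inr ⟨htr _ _ _ h h1', h2'⟩)
    · exact Or.inr (Or.inl ⟨h1, htr _ _ _ h2 h'⟩)
    · exact Or.inl (htr _ _ _ h1 (htr _ _ _ (hsym _ _ (htr _ _ _ h2 h1')) h2'))
    · exact Or.inl (htr _ _ _ h1 h2')
    · exact Or.inr (Or.inr ⟨h1, htr _ _ _ h2 h'⟩)
    · exact Or.inl (htr _ _ _ h1 h2')
    · exact Or.inl (htr _ _ _ h1 (htr _ _ _ (hsym _ _ (htr _ _ _ h2 h1')) h2'))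

-- ## B-side: how one scanned cell changes the stage relation

lemma pvBefore_succ_iff {r c : ℕ} {z : ℕ × ℕ} :
    pvBefore r (c + 1) z ↔ pvBefore r c z ∨ (z.1 = r ∧ z.2 = c) := by
  unfold pvBefore
  omega

lemma pvNear_irrefl {z : ℕ × ℕ} : ¬ pvNear z z := by
  unfold pvNear
  omega

lemma pvSD_succ_iff {graph : List String} {X Y r c : ℕ} {z : ℕ × ℕ} :
    pvSD graph X Y r (c + 1) z ↔
      pvSD graph X Y r c z ∨ (z = (r, c) ∧ pvInb X Y z ∧ pvDot graph z) := by
  unfold pvSD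
  rw [pvBefore_succ_iff]
  constructor
  · rintro ⟨h1, h2, h3 | h3⟩
    · exact Or.inl ⟨h1, h2, h3⟩
    · refine Or.inr ⟨?_, h1, h2⟩
      obtain ⟨za, zb⟩ := z
      simp only at h3
      simp [h3.1, h3.2]
  · rintro (⟨h1, h2, h3⟩ | ⟨rfl, h1, h2⟩)
    · exact ⟨h1, h2, Or.inl h3⟩
    · exact ⟨h1, h2, Or.inr ⟨rfl, rfl⟩⟩

lemma pvStepB_succ_iff {graph : List String} {X Y r c : ℕ} (hr : r < X) (hc : c < Y)
    (hdotC : pvDot graph (r, c)) {p q : ℕ × ℕ} :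
    pvStepB graph X Y r (c + 1) p q ↔
      pvStepB graph X Y r c p q ∨
      ((0 < c ∧ pvDot graph (r, c - 1)) ∧
        ((p = (r, c) ∧ q = (r, c - 1)) ∨ (p = (r, c - 1) ∧ q = (r, c)))) ∨
      ((0 < r ∧ pvDot graph (r - 1, c)) ∧
        ((p = (r, c) ∧ q = (r - 1, c)) ∨ (p = (r - 1, c) ∧ q = (r, c)))) := by
  constructor
  · rintro ⟨hadj, hbp, hbq⟩
    rw [pvBefore_succ_iff] at hbp hbq
    obtain ⟨hip, hiq, hdp, hdq, hnear⟩ := hadj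
    by_cases hpC : p = (r, c)
    · subst hpC
      have hqC : ¬ q = (r, c) := by
        intro h
        subst h
        exact pvNear_irrefl hnear
      have hbq' : pvBefore r c q := by
        rcases hbq with h | h
        · exact h
        · exact absurd (by obtain ⟨qa, qb⟩ := q; simp only at h; simp [h.1, h.2] : q = (r, c)) hqC
      unfold pvNear at hnear
      simp only at hnear
      unfold pvBefore at hbq'
      rcases hnear with ⟨h1, h2 | h2⟩ | ⟨h1, h2 | h2⟩
      · -- q = (r, c+1): not scanned yet, impossible
        exfalso
        omega
      · -- q = (r, c-1)
        have hq : q = (r, c - 1) := by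
          obtain ⟨qa, qb⟩ := q
          simp only at h1 h2
          have : qa = r ∧ qb = c - 1 := by omega
          simp [this.1, this.2]
        have hc0 : 0 < c := by
          obtain ⟨qa, qb⟩ := q
          simp only at h2
          omega
        refine Or.inr (Or.inl ⟨⟨hc0, by rw [← hq]; exact hdq⟩, Or.inl ⟨rfl, hq⟩⟩)
      · -- q = (r+1, c): not scanned yet
        exfalso
        omega
      · -- q = (r-1, c)
        have hq : q = (r - 1, c) := by
          obtain ⟨qa, qb⟩ := q
          simp only at h1 h2
          have : qa = r - 1 ∧ qb = c := by omega
          simp [this.1, this.2]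
        have hr0 : 0 < r := by
          obtain ⟨qa, qb⟩ := q
          simp only at h2
          omega
        refine Or.inr (Or.inr ⟨⟨hr0, by rw [← hq]; exact hdq⟩, Or.inl ⟨rfl, hq⟩⟩)
    · by_cases hqC : q = (r, c)
      · subst hqC
        have hbp' : pvBefore r c p := by
          rcases hbp with h | h
          · exact h
          · exact absurd (by obtain ⟨pa, pb⟩ := p; simp only at h; simp [h.1, h.2] : p = (r, c)) hpC
        unfold pvNear at hnear
        simp only at hnear
        unfold pvBefore at hbp'
        rcases hnear with ⟨h1, h2 | h2⟩ | ⟨h1, h2 | h2⟩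
        · -- p = (r, c-1)
          have hp : p = (r, c - 1) := by
            obtain ⟨pa, pb⟩ := p
            simp only at h1 h2
            have : pa = r ∧ pb = c - 1 := by omega
            simp [this.1, this.2]
          have hc0 : 0 < p.2 + 1 := by omega
          have hc0' : 0 < c := by
            obtain ⟨pa, pb⟩ := p
            simp only at h1 h2
            omega
          exact Or.inr (Or.inl ⟨⟨hc0', by rw [← hp]; exact hdp⟩, Or.inr ⟨hp, rfl⟩⟩)
        · exfalso
          omega
        · -- p = (r-1, c)
          have hp : p = (r - 1, c) := by
            obtain ⟨pa, pb⟩ := p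
            simp only at h1 h2
            have : pa = r - 1 ∧ pb = c := by omega
            simp [this.1, this.2]
          have hr0 : 0 < r := by
            obtain ⟨pa, pb⟩ := p
            simp only at h1 h2
            omega
          exact Or.inr (Or.inr ⟨⟨hr0, by rw [← hp]; exact hdp⟩, Or.inr ⟨hp, rfl⟩⟩)
        · exfalso
          omega
      · -- neither endpoint is the new cell
        have h1 : pvBefore r c p := by
          rcases hbp with h | h
          · exact h
          · exact absurd (by obtain ⟨pa, pb⟩ := p; simp only at h; simp [h.1, h.2] : p = (r, c)) hpC
        have h2 : pvBefore r c q := by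
          rcases hbq with h | h
          · exact h
          · exact absurd (by obtain ⟨qa, qb⟩ := q; simp only at h; simp [h.1, h.2] : q = (r, c)) hqC
        exact Or.inl ⟨⟨hip, hiq, hdp, hdq, hnear⟩, h1, h2⟩
  · rintro (⟨hadj, h1, h2⟩ | ⟨⟨hc0, hdL⟩, hpq⟩ | ⟨⟨hr0, hdU⟩, hpq⟩)
    · exact ⟨hadj, pvBefore_succ_iff.mpr (Or.inl h1), pvBefore_succ_iff.mpr (Or.inl h2)⟩
    · have hinbC : pvInb X Y (r, c) := ⟨hr, hc⟩
      have hinbL : pvInb X Y (r, c - 1) := ⟨hr, Nat.lt_of_le_of_lt (Nat.sub_le c 1) hc⟩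
      have hnear : pvNear (r, c) (r, c - 1) :=
        Or.inl ⟨rfl, Or.inr (Nat.succ_pred_eq_of_pos hc0)⟩
      have hbC : pvBefore r (c + 1) (r, c) := Or.inr ⟨rfl, Nat.lt_succ_self c⟩
      have hbL : pvBefore r (c + 1) (r, c - 1) :=
        Or.inr ⟨rfl, Nat.lt_succ_of_le (Nat.sub_le c 1)⟩
      rcases hpq with ⟨rfl, rfl⟩ | ⟨rfl, rfl⟩
      · exact ⟨⟨hinbC, hinbL, hdotC, hdL, hnear⟩, hbC, hbL⟩
      · exact ⟨⟨hinbL, hinbC, hdL, hdotC, pvNear_symm hnear⟩, hbL, hbC⟩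
    · have hinbC : pvInb X Y (r, c) := ⟨hr, hc⟩
      have hinbU : pvInb X Y (r - 1, c) := ⟨Nat.lt_of_le_of_lt (Nat.sub_le r 1) hr, hc⟩
      have hnear : pvNear (r, c) (r - 1, c) :=
        Or.inr ⟨rfl, Or.inr (Nat.succ_pred_eq_of_pos hr0)⟩
      have hbC : pvBefore r (c + 1) (r, c) := Or.inr ⟨rfl, Nat.lt_succ_self c⟩
      have hbU : pvBefore r (c + 1) (r - 1, c) := Or.inl (Nat.sub_lt hr0 Nat.one_pos)
      rcases hpq with ⟨rfl, rfl⟩ | ⟨rfl, rfl⟩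
      · exact ⟨⟨hinbC, hinbU, hdotC, hdU, hnear⟩, hbC, hbU⟩
      · exact ⟨⟨hinbU, hinbC, hdU, hdotC, pvNear_symm hnear⟩, hbU, hbC⟩

-- generic upper bound: anything the new stage relates was built from the
-- reflexivity, edges and transitivity available after this cell's unions
lemma pvRsucc_to {graph : List String} {X Y r c : ℕ} (Rfin : Int → Int → Prop)
    (hrefl : ∀ z, pvSD graph X Y r (c + 1) z → Rfin (pvIdx Y z : Int) (pvIdx Y z : Int))
    (htr : ∀ i j k, Rfin i j → Rfin j k → Rfin i k)
    (hedge : ∀ z w, pvStepB graph X Y r (c + 1) z w →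
      Rfin (pvIdx Y z : Int) (pvIdx Y w : Int)) :
    ∀ j k, pvRscan graph X Y r (c + 1) j k → Rfin j k := by
  rintro j k ⟨p, q, rfl, rfl, hp, hq, hrt⟩
  clear hq
  induction hrt with
  | refl => exact hrefl p hp
  | tail _ hstep ih => exact htr _ _ _ ih (hedge _ _ hstep)

-- ## B-side: stage congruences

lemma pvRscan_succ_nodot {graph : List String} {X Y r c : ℕ}
    (hnd : ¬ pvDot graph (r, c)) (j k : Int) :
    pvRscan graph X Y r (c + 1) j k ↔ pvRscan graph X Y r c j k := by
  have hSD : ∀ z, pvSD graph X Y r (c + 1) z ↔ pvSD graph X Y r c z := by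
    intro z
    rw [pvSD_succ_iff]
    constructor
    · rintro (h | ⟨rfl, _, hd⟩)
      · exact h
      · exact absurd hd hnd
    · exact Or.inl
  have hstep : ∀ p q, pvStepB graph X Y r (c + 1) p q ↔ pvStepB graph X Y r c p q := by
    intro p q
    constructor
    · rintro ⟨hadj, h1, h2⟩
      rw [pvBefore_succ_iff] at h1 h2
      have hp : pvBefore r c p := by
        rcases h1 with h | h
        · exact h
        · exfalso
          apply hnd
          have : p = (r, c) := by
            obtain ⟨pa, pb⟩ := p
            simp only at h
            simp [h.1, h.2]
          rw [← this]
          exact hadj.2.2.1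
      have hq : pvBefore r c q := by
        rcases h2 with h | h
        · exact h
        · exfalso
          apply hnd
          have : q = (r, c) := by
            obtain ⟨qa, qb⟩ := q
            simp only at h
            simp [h.1, h.2]
          rw [← this]
          exact hadj.2.2.2.1
      exact ⟨hadj, hp, hq⟩
    · rintro ⟨hadj, h1, h2⟩
      exact ⟨hadj, pvBefore_succ_iff.mpr (Or.inl h1), pvBefore_succ_iff.mpr (Or.inl h2)⟩
  unfold pvRscan
  constructor
  · rintro ⟨p, q, h1, h2, h3, h4, h5⟩
    exact ⟨p, q, h1, h2, (hSD p).mp h3, (hSD q).mp h4,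
      pvRT_congr (fun a b => hstep a b) h5⟩
  · rintro ⟨p, q, h1, h2, h3, h4, h5⟩
    exact ⟨p, q, h1, h2, (hSD p).mpr h3, (hSD q).mpr h4,
      pvRT_congr (fun a b => (hstep a b).symm) h5⟩

lemma pvRscan_row_iff {graph : List String} {X Y r : ℕ} (j k : Int) :
    pvRscan graph X Y (r + 1) 0 j k ↔ pvRscan graph X Y r Y j k := by
  have hb : ∀ z : ℕ × ℕ, z.2 < Y → (pvBefore (r + 1) 0 z ↔ pvBefore r Y z) := by
    intro z hz
    unfold pvBefore
    omega
  have hSD : ∀ z, pvSD graph X Y (r + 1) 0 z ↔ pvSD graph X Y r Y z := by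
    intro z
    unfold pvSD
    constructor
    · rintro ⟨h1, h2, h3⟩
      exact ⟨h1, h2, (hb z h1.2).mp h3⟩
    · rintro ⟨h1, h2, h3⟩
      exact ⟨h1, h2, (hb z h1.2).mpr h3⟩
  have hstep : ∀ p q, pvStepB graph X Y (r + 1) 0 p q ↔ pvStepB graph X Y r Y p q := by
    intro p q
    unfold pvStepB
    constructor
    · rintro ⟨hadj, h1, h2⟩
      exact ⟨hadj, (hb p hadj.1.2).mp h1, (hb q hadj.2.1.2).mp h2⟩
    · rintro ⟨hadj, h1, h2⟩
      exact ⟨hadj, (hb p hadj.1.2).mpr h1, (hb q hadj.2.1.2).mpr h2⟩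
  unfold pvRscan
  constructor
  · rintro ⟨p, q, h1, h2, h3, h4, h5⟩
    exact ⟨p, q, h1, h2, (hSD p).mp h3, (hSD q).mp h4,
      pvRT_congr (fun a b => hstep a b) h5⟩
  · rintro ⟨p, q, h1, h2, h3, h4, h5⟩
    exact ⟨p, q, h1, h2, (hSD p).mpr h3, (hSD q).mpr h4,
      pvRT_congr (fun a b => (hstep a b).symm) h5⟩

lemma pvRscan_final_iff {graph : List String} {X Y : ℕ} (j k : Int) :
    pvRscan graph X Y X 0 j k ↔
      ∃ p q : ℕ × ℕ, j = (pvIdx Y p : Int) ∧ k = (pvIdx Y q : Int) ∧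
        (pvInb X Y p ∧ pvDot graph p) ∧ (pvInb X Y q ∧ pvDot graph q) ∧
        pvConn graph X Y p q := by
  have hb : ∀ z : ℕ × ℕ, z.1 < X → pvBefore X 0 z := by
    intro z hz
    exact Or.inl hz
  have hstep : ∀ p q, pvStepB graph X Y X 0 p q ↔ pvAdj graph X Y p q := by
    intro p q
    unfold pvStepB
    constructor
    · rintro ⟨hadj, _, _⟩
      exact hadj
    · intro hadj
      exact ⟨hadj, hb p hadj.1.1, hb q hadj.2.1.1⟩
  unfold pvRscan pvConn
  constructor
  · rintro ⟨p, q, h1, h2, h3, h4, h5⟩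
    exact ⟨p, q, h1, h2, ⟨h3.1, h3.2.1⟩, ⟨h4.1, h4.2.1⟩,
      pvRT_congr (fun a b => hstep a b) h5⟩
  · rintro ⟨p, q, h1, h2, h3, h4, h5⟩
    exact ⟨p, q, h1, h2, ⟨h3.1, h3.2, hb p h3.1.1⟩, ⟨h4.1, h4.2, hb q h4.1.1⟩,
      pvRT_congr (fun a b => (hstep a b).symm) h5⟩

lemma pvKeysSpec_succ_dot {graph : List String} {Y r c : ℕ}
    (hdot : pvDot graph (r, c)) :
    pvKeysSpec graph Y r (c + 1) = pvKeysSpec graph Y r c ++ [(pvIdx Y (r, c) : Int)] := by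
  unfold pvKeysSpec
  rw [pvScan_succ, List.filter_append, List.map_append]
  congr 1
  have h1 : pvCell graph ((r : ℕ) : Int) ((c : ℕ) : Int) = some '.' := hdot
  have h2 : (pvCell graph ((r : ℕ) : Int) ((c : ℕ) : Int) == some '.') = true :=
    beq_iff_eq.mpr h1
  simp [List.filter, h2]

lemma pvKeysSpec_succ_nodot {graph : List String} {Y r c : ℕ}
    (hnd : ¬ pvDot graph (r, c)) :
    pvKeysSpec graph Y r (c + 1) = pvKeysSpec graph Y r c := by
  unfold pvKeysSpec
  rw [pvScan_succ, List.filter_append, List.map_append]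
  have h1 : ¬ pvCell graph ((r : ℕ) : Int) ((c : ℕ) : Int) = some '.' := hnd
  have h2 : (pvCell graph ((r : ℕ) : Int) ((c : ℕ) : Int) == some '.') = false := by
    simp [h1]
  simp [List.filter, h2]

lemma pvKeysSpec_row {graph : List String} {Y r : ℕ} :
    pvKeysSpec graph Y (r + 1) 0 = pvKeysSpec graph Y r Y := by
  unfold pvKeysSpec
  rw [pvScan_row]

lemma pvUnion_self (d : PySem.Dict Int Int) (a : Int) : pvUnion d a a = d := by
  simp [pvUnion]

-- the new cell is isolated at stage (r, c)
lemma pvR0iso {graph : List String} {X Y r c : ℕ} (hc : c < Y) :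
    ∀ j, ¬ pvRscan graph X Y r c j (pvIdx Y (r, c) : Int) := by
  rintro j ⟨p, q, h1, h2, h3, h4, h5⟩
  have hq : q = (r, c) := pvIdx_inj h4.1.2 hc (by omega)
  subst hq
  rcases h4.2.2 with h | h
  · simp at h
  · simp only at h
    omega

lemma pvFreshCell {graph : List String} {Y r c : ℕ} (hc : c < Y)
    {parent : PySem.Dict Int Int} (hkeys : parent.keys = pvKeysSpec graph Y r c) :
    parent.contains (pvIdx Y (r, c) : Int) = false := by
  have hnm : (pvIdx Y (r, c) : Int) ∉ parent.keys := by
    rw [hkeys]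
    intro hmem
    obtain ⟨p, he, hmem', hdotp⟩ := mem_pvKeysSpec.mp hmem
    have hp2 : p.2 < Y := by
      rw [mem_pvScan] at hmem'
      omega
    have : p = (r, c) := pvIdx_inj hp2 hc (by omega)
    subst this
    rw [mem_pvScan] at hmem'
    simp only at hmem'
    omega
  rw [PySem.Dict.contains_eq_decide_mem_keys]
  simp [hnm]

-- stage 1: inserting the fresh cell as its own class
lemma pvInsertStep {graph : List String} {X Y r c : ℕ} (hr : r < X) (hc : c < Y)
    {parent : PySem.Dict Int Int}
    (hkeys : parent.keys = pvKeysSpec graph Y r c)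
    (hUF : pvUFinv parent (pvRscan graph X Y r c)) :
    (parent.insert (pvIdx Y (r, c) : Int) (pvIdx Y (r, c) : Int)).keys =
      pvKeysSpec graph Y r c ++ [(pvIdx Y (r, c) : Int)] ∧
    pvUFinv (parent.insert (pvIdx Y (r, c) : Int) (pvIdx Y (r, c) : Int))
      (fun j k => pvRscan graph X Y r c j k ∨
        (j = (pvIdx Y (r, c) : Int) ∧ k = (pvIdx Y (r, c) : Int))) := by
  have hfresh := pvFreshCell (graph := graph) hc hkeys
  have hR0good : pvRgood parent (pvRscan graph X Y r c) :=
    pvRgood_scan hkeys (pvScan_cell_inb hr (le_of_lt hc))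
  obtain ⟨hnd0, hK20, hroot0⟩ := hUF
  have hch0 := pvUFinv_chain ⟨hnd0, hK20, hroot0⟩
  have hcont1 : ∀ k,
      (parent.insert (pvIdx Y (r, c) : Int) (pvIdx Y (r, c) : Int)).contains k =
      (k == (pvIdx Y (r, c) : Int) || parent.contains k) :=
    fun k => PySem.Dict.contains_insert ..
  refine ⟨by rw [PySem.Dict.keys_insert_of_not_contains parent _ hfresh, hkeys],
    PySem.Dict.nodup_keys_insert _ _ _ hnd0, ?_, ?_⟩
  · intro k v hget
    rw [PySem.Dict.get?_insert] at hget
    by_cases hk : k = (pvIdx Y (r, c) : Int)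
    · rw [if_pos hk] at hget
      have hv : v = (pvIdx Y (r, c) : Int) := (Option.some.inj hget).symm
      rw [hv, hk]
      refine ⟨by positivity, le_refl _, ?_, Or.inr ⟨rfl, rfl⟩⟩
      rw [hcont1]
      simp
    · rw [if_neg hk] at hget
      obtain ⟨h1, h2, h3, h4⟩ := hK20 k v hget
      refine ⟨h1, h2, ?_, Or.inl h4⟩
      rw [hcont1, h3]
      simp
  · intro k hk
    rw [hcont1] at hk
    by_cases hkiC : k = (pvIdx Y (r, c) : Int)
    · subst hkiC
      have hget : (parent.insert (pvIdx Y (r, c) : Int) (pvIdx Y (r, c) : Int)).get?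
          (pvIdx Y (r, c) : Int) = some (pvIdx Y (r, c) : Int) :=
        PySem.Dict.get?_insert_self ..
      have hroot : pvRoot (parent.insert (pvIdx Y (r, c) : Int) (pvIdx Y (r, c) : Int))
          (pvIdx Y (r, c) : Int) = (pvIdx Y (r, c) : Int) :=
        pvFind_fix hget (by omega)
      rw [hroot]
      refine ⟨Or.inr ⟨rfl, rfl⟩, ?_⟩
      rintro j (hj | ⟨rfl, _⟩)
      · exact absurd hj (pvR0iso hc j)
      · exact le_refl _
    · have hk' : parent.contains k = true := by
        simp only [Bool.or_eq_true, beq_iff_eq] at hk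
        rcases hk with h | h
        · exact absurd h hkiC
        · exact h
      have h0k : 0 ≤ k := hR0good.2.2.2.2 k hk'
      have hroot : pvRoot (parent.insert (pvIdx Y (r, c) : Int) (pvIdx Y (r, c) : Int)) k =
          pvRoot parent k :=
        pvFind_insert_fresh hch0 hfresh (k.toNat + 1) k hk' h0k (by omega)
      rw [hroot]
      obtain ⟨ha, hb⟩ := hroot0 k hk'
      refine ⟨Or.inl ha, ?_⟩
      rintro j (hj | ⟨hj1, hj2⟩)
      · exact hb j hj
      · exact absurd hj2 hkiC

-- R1 is equivalence-like on the inserted dict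
lemma pvR1good {graph : List String} {X Y r c : ℕ} (hr : r < X) (hc : c < Y)
    {p1 : PySem.Dict Int Int}
    (hkeys1 : p1.keys = pvKeysSpec graph Y r c ++ [(pvIdx Y (r, c) : Int)]) :
    pvRgood p1 (fun j k => pvRscan graph X Y r c j k ∨
      (j = (pvIdx Y (r, c) : Int) ∧ k = (pvIdx Y (r, c) : Int))) := by
  have hcontains : ∀ k, p1.contains k = true ↔
      (k ∈ pvKeysSpec graph Y r c ∨ k = (pvIdx Y (r, c) : Int)) := by
    intro k
    rw [PySem.Dict.contains_iff_mem_keys, hkeys1]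
    simp
  have hscan := pvScan_cell_inb (X := X) (Y := Y) (r := r) (c := c) hr (le_of_lt hc)
  refine ⟨?_, ?_, ?_, ?_, ?_⟩
  · rintro j k (h | ⟨rfl, rfl⟩)
    · exact Or.inl (pvRscan_symm h)
    · exact Or.inr ⟨rfl, rfl⟩
  · rintro a b c' (h | ⟨rfl, rfl⟩) (h' | ⟨he1, he2⟩)
    · exact Or.inl (pvRscan_trans h h')
    · exact absurd (he1 ▸ h) (pvR0iso hc a)
    · exact absurd h' (fun hh => pvR0iso hc c' (pvRscan_symm hh))
    · exact Or.inr ⟨rfl, he2⟩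
  · intro k hk
    rcases (hcontains k).mp hk with h | rfl
    · obtain ⟨p, rfl, hmem, hdotp⟩ := mem_pvKeysSpec.mp h
      have hinb := hscan p hmem
      exact Or.inl ⟨p, p, rfl, rfl, ⟨hinb, hdotp, (pvBefore_iff_mem_scan hinb.2).mpr hmem⟩,
        ⟨hinb, hdotp, (pvBefore_iff_mem_scan hinb.2).mpr hmem⟩, Relation.ReflTransGen.refl⟩
    · exact Or.inr ⟨rfl, rfl⟩
  · rintro j k (h | ⟨rfl, rfl⟩)
    · obtain ⟨p, q, rfl, rfl, h3, h4, _⟩ := h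
      constructor
      · rw [hcontains]
        exact Or.inl (mem_pvKeysSpec.mpr ⟨p, rfl, (pvBefore_iff_mem_scan h3.1.2).mp h3.2.2, h3.2.1⟩)
      · rw [hcontains]
        exact Or.inl (mem_pvKeysSpec.mpr ⟨q, rfl, (pvBefore_iff_mem_scan h4.1.2).mp h4.2.2, h4.2.1⟩)
    · constructor <;> (rw [hcontains]; exact Or.inr rfl)
  · intro k hk
    rcases (hcontains k).mp hk with h | rfl
    · obtain ⟨p, rfl, _, _⟩ := mem_pvKeysSpec.mp h
      positivity
    · positivity

-- joining keeps the relation equivalence-like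
lemma pvJoin_rgood {parent parent' : PySem.Dict Int Int} {R : Int → Int → Prop} {a b : Int}
    (hkeys : parent'.keys = parent.keys) (hg : pvRgood parent R)
    (ha' : R a a) (hb' : R b b) :
    pvRgood parent' (fun j k => R j k ∨ (R j a ∧ R b k) ∨ (R j b ∧ R a k)) := by
  obtain ⟨hsym, htr, hrefl, hdom, hkey0⟩ := hg
  obtain ⟨hjs, hjt⟩ := pvJoin_good (R := R) (a := a) (b := b)
    (fun j k h => hsym j k h) (fun i j k h h' => htr i j k h h') ha' hb'
  have hcont : ∀ k, parent'.contains k = parent.contains k := pvContains_congr hkeys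
  refine ⟨hjs, hjt, ?_, ?_, ?_⟩
  · intro k hk
    rw [hcont] at hk
    exact Or.inl (hrefl k hk)
  · rintro j k (h | ⟨h1, h2⟩ | ⟨h1, h2⟩)
    · rw [hcont, hcont]
      exact hdom j k h
    · rw [hcont, hcont]
      exact ⟨(hdom _ _ h1).1, (hdom _ _ h2).2⟩
    · rw [hcont, hcont]
      exact ⟨(hdom _ _ h1).1, (hdom _ _ h2).2⟩
  · intro k hk
    rw [hcont] at hk
    exact hkey0 k hk

-- ## B-side: the relation built by one cell's unions

def pvR1 (graph : List String) (X Y r c : ℕ) (j k : Int) : Prop :=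
  pvRscan graph X Y r c j k ∨ (j = (pvIdx Y (r, c) : Int) ∧ k = (pvIdx Y (r, c) : Int))

def pvAL (graph : List String) (Y r c : ℕ) : Int :=
  if 0 < c ∧ pvCell graph (r : Int) ((c - 1 : ℕ) : Int) = some '.' then
    (pvIdx Y (r, c - 1) : Int)
  else (pvIdx Y (r, c) : Int)

def pvAU (graph : List String) (Y r c : ℕ) : Int :=
  if 0 < r ∧ pvCell graph ((r - 1 : ℕ) : Int) (c : Int) = some '.' then
    (pvIdx Y (r - 1, c) : Int)
  else (pvIdx Y (r, c) : Int)

def pvR2 (graph : List String) (X Y r c : ℕ) (j k : Int) : Prop :=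
  pvR1 graph X Y r c j k ∨
  (pvR1 graph X Y r c j (pvIdx Y (r, c) : Int) ∧ pvR1 graph X Y r c (pvAL graph Y r c) k) ∨
  (pvR1 graph X Y r c j (pvAL graph Y r c) ∧ pvR1 graph X Y r c (pvIdx Y (r, c) : Int) k)

def pvR3 (graph : List String) (X Y r c : ℕ) (j k : Int) : Prop :=
  pvR2 graph X Y r c j k ∨
  (pvR2 graph X Y r c j (pvIdx Y (r, c) : Int) ∧ pvR2 graph X Y r c (pvAU graph Y r c) k) ∨
  (pvR2 graph X Y r c j (pvAU graph Y r c) ∧ pvR2 graph X Y r c (pvIdx Y (r, c) : Int) k)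

lemma pvR1_symm {graph : List String} {X Y r c : ℕ} {j k : Int}
    (h : pvR1 graph X Y r c j k) : pvR1 graph X Y r c k j := by
  rcases h with h | ⟨h1, h2⟩
  · exact Or.inl (pvRscan_symm h)
  · exact Or.inr ⟨h2, h1⟩

lemma pvR1_trans {graph : List String} {X Y r c : ℕ} (hc : c < Y) {a b c' : Int}
    (h : pvR1 graph X Y r c a b) (h' : pvR1 graph X Y r c b c') :
    pvR1 graph X Y r c a c' := by
  rcases h with h | ⟨he1, he2⟩ <;> rcases h' with h' | ⟨he1', he2'⟩
  · exact Or.inl (pvRscan_trans h h')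
  · exact absurd (he1' ▸ h) (pvR0iso hc a)
  · exact absurd h' (fun hh => pvR0iso hc c' (pvRscan_symm (he2 ▸ hh)))
  · exact Or.inr ⟨he1, he2'⟩

lemma pvR1_refl_iC {graph : List String} {X Y r c : ℕ} :
    pvR1 graph X Y r c (pvIdx Y (r, c) : Int) (pvIdx Y (r, c) : Int) :=
  Or.inr ⟨rfl, rfl⟩

lemma pvR1_refl_aL {graph : List String} {X Y r c : ℕ} (hr : r < X) (hc : c < Y) :
    pvR1 graph X Y r c (pvAL graph Y r c) (pvAL graph Y r c) := by
  unfold pvAL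
  by_cases hgl : 0 < c ∧ pvCell graph (r : Int) ((c - 1 : ℕ) : Int) = some '.'
  · rw [if_pos hgl]
    obtain ⟨hc0, hdL⟩ := hgl
    have hSDL : pvSD graph X Y r c (r, c - 1) :=
      ⟨⟨hr, Nat.lt_of_le_of_lt (Nat.sub_le c 1) hc⟩, hdL,
        Or.inr ⟨rfl, Nat.sub_lt hc0 Nat.one_pos⟩⟩
    exact Or.inl ⟨_, _, rfl, rfl, hSDL, hSDL, Relation.ReflTransGen.refl⟩
  · rw [if_neg hgl]
    exact pvR1_refl_iC

lemma pvR1_refl_aU {graph : List String} {X Y r c : ℕ} (hr : r < X) (hc : c < Y) :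
    pvR1 graph X Y r c (pvAU graph Y r c) (pvAU graph Y r c) := by
  unfold pvAU
  by_cases hgu : 0 < r ∧ pvCell graph ((r - 1 : ℕ) : Int) (c : Int) = some '.'
  · rw [if_pos hgu]
    obtain ⟨hr0, hdU⟩ := hgu
    have hSDU : pvSD graph X Y r c (r - 1, c) :=
      ⟨⟨Nat.lt_of_le_of_lt (Nat.sub_le r 1) hr, hc⟩, hdU,
        Or.inl (Nat.sub_lt hr0 Nat.one_pos)⟩
    exact Or.inl ⟨_, _, rfl, rfl, hSDU, hSDU, Relation.ReflTransGen.refl⟩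
  · rw [if_neg hgu]
    exact pvR1_refl_iC

set_option maxHeartbeats 1000000 in
lemma pvR3_iff {graph : List String} {X Y r c : ℕ} (hr : r < X) (hc : c < Y)
    (hdotC : pvDot graph (r, c)) :
    ∀ j k, pvR3 graph X Y r c j k ↔ pvRscan graph X Y r (c + 1) j k := by
  have hSDC : pvSD graph X Y r (c + 1) (r, c) :=
    ⟨⟨hr, hc⟩, hdotC, Or.inr ⟨rfl, Nat.lt_succ_self c⟩⟩
  have hii : pvRscan graph X Y r (c + 1) (pvIdx Y (r, c) : Int) (pvIdx Y (r, c) : Int) :=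
    ⟨(r, c), (r, c), rfl, rfl, hSDC, hSDC, Relation.ReflTransGen.refl⟩
  have hmono : ∀ j k, pvRscan graph X Y r c j k → pvRscan graph X Y r (c + 1) j k := by
    rintro j k ⟨p, q, rfl, rfl, h3, h4, h5⟩
    exact ⟨p, q, rfl, rfl, pvSD_succ_iff.mpr (Or.inl h3), pvSD_succ_iff.mpr (Or.inl h4),
      Relation.ReflTransGen.mono
        (fun a b hab => (pvStepB_succ_iff hr hc hdotC).mpr (Or.inl hab)) h5⟩
  have hR1sub : ∀ j k, pvR1 graph X Y r c j k → pvRscan graph X Y r (c + 1) j k := by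
    rintro j k (h | ⟨rfl, rfl⟩)
    · exact hmono j k h
    · exact hii
  have hiAL : pvRscan graph X Y r (c + 1) (pvIdx Y (r, c) : Int) (pvAL graph Y r c) := by
    unfold pvAL
    by_cases hgl : 0 < c ∧ pvCell graph (r : Int) ((c - 1 : ℕ) : Int) = some '.'
    · rw [if_pos hgl]
      obtain ⟨hc0, hdL⟩ := hgl
      have hSDL : pvSD graph X Y r (c + 1) (r, c - 1) :=
        ⟨⟨hr, Nat.lt_of_le_of_lt (Nat.sub_le c 1) hc⟩, hdL,
          Or.inr ⟨rfl, Nat.lt_succ_of_le (Nat.sub_le c 1)⟩⟩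
      refine ⟨(r, c), (r, c - 1), rfl, rfl, hSDC, hSDL, Relation.ReflTransGen.single ?_⟩
      exact (pvStepB_succ_iff hr hc hdotC).mpr
        (Or.inr (Or.inl ⟨⟨hc0, hdL⟩, Or.inl ⟨rfl, rfl⟩⟩))
    · rw [if_neg hgl]
      exact hii
  have hiAU : pvRscan graph X Y r (c + 1) (pvIdx Y (r, c) : Int) (pvAU graph Y r c) := by
    unfold pvAU
    by_cases hgu : 0 < r ∧ pvCell graph ((r - 1 : ℕ) : Int) (c : Int) = some '.'
    · rw [if_pos hgu]
      obtain ⟨hr0, hdU⟩ := hgu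
      have hSDU : pvSD graph X Y r (c + 1) (r - 1, c) :=
        ⟨⟨Nat.lt_of_le_of_lt (Nat.sub_le r 1) hr, hc⟩, hdU,
          Or.inl (Nat.sub_lt hr0 Nat.one_pos)⟩
      refine ⟨(r, c), (r - 1, c), rfl, rfl, hSDC, hSDU, Relation.ReflTransGen.single ?_⟩
      exact (pvStepB_succ_iff hr hc hdotC).mpr
        (Or.inr (Or.inr ⟨⟨hr0, hdU⟩, Or.inl ⟨rfl, rfl⟩⟩))
    · rw [if_neg hgu]
      exact hii
  have hR2sub : ∀ j k, pvR2 graph X Y r c j k → pvRscan graph X Y r (c + 1) j k := by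
    rintro j k (h | ⟨h1, h2⟩ | ⟨h1, h2⟩)
    · exact hR1sub j k h
    · exact pvRscan_trans (pvRscan_trans (hR1sub _ _ h1) hiAL) (hR1sub _ _ h2)
    · exact pvRscan_trans (pvRscan_trans (hR1sub _ _ h1) (pvRscan_symm hiAL))
        (hR1sub _ _ h2)
  have hR3sub : ∀ j k, pvR3 graph X Y r c j k → pvRscan graph X Y r (c + 1) j k := by
    rintro j k (h | ⟨h1, h2⟩ | ⟨h1, h2⟩)
    · exact hR2sub j k h
    · exact pvRscan_trans (pvRscan_trans (hR2sub _ _ h1) hiAU) (hR2sub _ _ h2)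
    · exact pvRscan_trans (pvRscan_trans (hR2sub _ _ h1) (pvRscan_symm hiAU))
        (hR2sub _ _ h2)
  -- transitivity of the layered join
  obtain ⟨hR2sym, hR2tr⟩ := pvJoin_good (R := pvR1 graph X Y r c)
    (a := (pvIdx Y (r, c) : Int)) (b := pvAL graph Y r c)
    (fun j k h => pvR1_symm h) (fun i j k h h' => pvR1_trans hc h h')
    pvR1_refl_iC (pvR1_refl_aL hr hc)
  obtain ⟨hR3sym, hR3tr⟩ := pvJoin_good (R := pvR2 graph X Y r c)
    (a := (pvIdx Y (r, c) : Int)) (b := pvAU graph Y r c)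
    (fun j k h => hR2sym j k h) (fun i j k h h' => hR2tr i j k h h')
    (Or.inl pvR1_refl_iC) (Or.inl (pvR1_refl_aU hr hc))
  intro j k
  constructor
  · exact hR3sub j k
  · refine pvRsucc_to (pvR3 graph X Y r c) ?_ (fun a b c' h h' => hR3tr a b c' h h') ?_ j k
    · -- reflexivity on the new vertex set
      intro z hz
      rcases pvSD_succ_iff.mp hz with h | ⟨rfl, _, _⟩
      · exact Or.inl (Or.inl (Or.inl ⟨z, z, rfl, rfl, h, h, Relation.ReflTransGen.refl⟩))
      · exact Or.inl (Or.inl pvR1_refl_iC)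
    · -- every available edge is in the built relation
      intro z w hstep
      rcases (pvStepB_succ_iff hr hc hdotC).mp hstep with h | ⟨⟨hc0, hdL⟩, hor⟩ | ⟨⟨hr0, hdU⟩, hor⟩
      · obtain ⟨hadj, hbz, hbw⟩ := h
        exact Or.inl (Or.inl (Or.inl ⟨z, w, rfl, rfl,
          ⟨hadj.1, hadj.2.2.1, hbz⟩, ⟨hadj.2.1, hadj.2.2.2.1, hbw⟩,
          Relation.ReflTransGen.single ⟨hadj, hbz, hbw⟩⟩))
      · have haL : pvAL graph Y r c = (pvIdx Y (r, c - 1) : Int) := if_pos ⟨hc0, hdL⟩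
        have hALAL := pvR1_refl_aL (graph := graph) (X := X) hr hc
        rcases hor with ⟨rfl, rfl⟩ | ⟨rfl, rfl⟩
        · refine Or.inl (Or.inr (Or.inl ⟨pvR1_refl_iC, ?_⟩))
          rw [haL] at hALAL ⊢
          exact hALAL
        · refine Or.inl (Or.inr (Or.inr ⟨?_, pvR1_refl_iC⟩))
          rw [haL] at hALAL ⊢
          exact hALAL
      · have haU : pvAU graph Y r c = (pvIdx Y (r - 1, c) : Int) := if_pos ⟨hr0, hdU⟩
        have hAUAU := pvR1_refl_aU (graph := graph) (X := X) hr hc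
        rcases hor with ⟨rfl, rfl⟩ | ⟨rfl, rfl⟩
        · refine Or.inr (Or.inl ⟨Or.inl pvR1_refl_iC, ?_⟩)
          rw [haU] at hAUAU ⊢
          exact Or.inl hAUAU
        · refine Or.inr (Or.inr ⟨?_, Or.inl pvR1_refl_iC⟩)
          rw [haU] at hAUAU ⊢
          exact Or.inl hAUAU

set_option maxHeartbeats 2000000 in
lemma pvBCellStep (graph : List String) (x y : Int) (X Y : ℕ)
    (_hx : (X : Int) = x) (hy : (Y : Int) = y) {r c : ℕ} (hr : r < X) (hc : c < Y)
    {parent : PySem.Dict Int Int}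
    (hkeys : parent.keys = pvKeysSpec graph Y r c)
    (hUF : pvUFinv parent (pvRscan graph X Y r c)) :
    (if pvCell graph (r : Int) (c : Int) = some '.' then
      let i := (r : Int) * y + (c : Int)
      let p1 := parent.insert i i
      let p2 := if 0 < (c : Int) ∧ pvCell graph (r : Int) ((c : Int) - 1) = some '.' then
          pvUnion p1 i ((r : Int) * y + ((c : Int) - 1)) else p1
      (if 0 < (r : Int) ∧ pvCell graph ((r : Int) - 1) (c : Int) = some '.' then
          pvUnion p2 i (((r : Int) - 1) * y + (c : Int)) else p2)
    else parent).keys = pvKeysSpec graph Y r (c + 1) ∧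
    pvUFinv (if pvCell graph (r : Int) (c : Int) = some '.' then
      let i := (r : Int) * y + (c : Int)
      let p1 := parent.insert i i
      let p2 := if 0 < (c : Int) ∧ pvCell graph (r : Int) ((c : Int) - 1) = some '.' then
          pvUnion p1 i ((r : Int) * y + ((c : Int) - 1)) else p1
      (if 0 < (r : Int) ∧ pvCell graph ((r : Int) - 1) (c : Int) = some '.' then
          pvUnion p2 i (((r : Int) - 1) * y + (c : Int)) else p2)
    else parent) (pvRscan graph X Y r (c + 1)) := by
  by_cases hdot : pvCell graph (r : Int) (c : Int) = some '.'
  case neg =>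
    rw [if_neg hdot]
    have hnd : ¬ pvDot graph (r, c) := hdot
    refine ⟨by rw [hkeys, pvKeysSpec_succ_nodot hnd], ?_⟩
    exact pvUFinv_congr (fun j k => (pvRscan_succ_nodot hnd j k).symm) hUF
  case pos =>
    rw [if_pos hdot]
    have hdotC : pvDot graph (r, c) := hdot
    have hiC : (r : Int) * y + (c : Int) = (pvIdx Y (r, c) : Int) := by
      rw [← hy]
      unfold pvIdx
      push_cast
      ring
    have hℓC : 0 < c → (r : Int) * y + ((c : Int) - 1) = (pvIdx Y (r, c - 1) : Int) := by
      intro hc0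
      rw [← hy]
      unfold pvIdx
      simp only
      push_cast [Nat.cast_sub (show 1 ≤ c by omega)]
      ring
    have huC : 0 < r → ((r : Int) - 1) * y + (c : Int) = (pvIdx Y (r - 1, c) : Int) := by
      intro hr0
      rw [← hy]
      unfold pvIdx
      simp only
      push_cast [Nat.cast_sub (show 1 ≤ r by omega)]
      ring
    obtain ⟨hkeys1, hUF1⟩ := pvInsertStep hr hc hkeys hUF
    have hUF1' : pvUFinv (parent.insert (pvIdx Y (r, c) : Int) (pvIdx Y (r, c) : Int))
        (pvR1 graph X Y r c) := hUF1
    have hR1good : pvRgood (parent.insert (pvIdx Y (r, c) : Int) (pvIdx Y (r, c) : Int))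
        (pvR1 graph X Y r c) := pvR1good hr hc hkeys1
    have hcontI : (parent.insert (pvIdx Y (r, c) : Int) (pvIdx Y (r, c) : Int)).contains
        (pvIdx Y (r, c) : Int) = true := PySem.Dict.contains_insert_self ..
    have hcontAL : (parent.insert (pvIdx Y (r, c) : Int) (pvIdx Y (r, c) : Int)).contains
        (pvAL graph Y r c) = true := by
      unfold pvAL
      by_cases hgl : 0 < c ∧ pvCell graph (r : Int) ((c - 1 : ℕ) : Int) = some '.'
      · rw [if_pos hgl]
        rw [PySem.Dict.contains_iff_mem_keys, hkeys1]
        refine List.mem_append.mpr (Or.inl ?_)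
        exact mem_pvKeysSpec.mpr ⟨(r, c - 1), rfl,
          mem_pvScan.mpr (Or.inr ⟨rfl, Nat.sub_lt hgl.1 Nat.one_pos⟩), hgl.2⟩
      · rw [if_neg hgl]
        exact hcontI
    -- turn the conditional left union into the uniform one
    have hp2eq : (if 0 < (c : Int) ∧ pvCell graph (r : Int) ((c : Int) - 1) = some '.' then
        pvUnion (parent.insert (pvIdx Y (r, c) : Int) (pvIdx Y (r, c) : Int))
          (pvIdx Y (r, c) : Int) ((r : Int) * y + ((c : Int) - 1))
      else parent.insert (pvIdx Y (r, c) : Int) (pvIdx Y (r, c) : Int)) =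
        pvUnion (parent.insert (pvIdx Y (r, c) : Int) (pvIdx Y (r, c) : Int))
          (pvIdx Y (r, c) : Int) (pvAL graph Y r c) := by
      by_cases hgl : 0 < c ∧ pvCell graph (r : Int) ((c - 1 : ℕ) : Int) = some '.'
      · have hglInt : 0 < (c : Int) ∧ pvCell graph (r : Int) ((c : Int) - 1) = some '.' := by
          refine ⟨by exact_mod_cast hgl.1, ?_⟩
          rw [show ((c : Int) - 1) = ((c - 1 : ℕ) : Int) by omega]
          exact hgl.2
        rw [if_pos hglInt, hℓC hgl.1]
        unfold pvAL
        rw [if_pos hgl]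
      · have hglInt : ¬ (0 < (c : Int) ∧ pvCell graph (r : Int) ((c : Int) - 1) = some '.') := by
          rintro ⟨h1, h2⟩
          refine hgl ⟨by exact_mod_cast h1, ?_⟩
          rw [show ((c - 1 : ℕ) : Int) = ((c : Int) - 1) by omega]
          exact h2
        rw [if_neg hglInt]
        unfold pvAL
        rw [if_neg hgl, pvUnion_self]
    obtain ⟨hUF2, hkeys2⟩ := pvUnion_spec hUF1' hR1good hcontI hcontAL
      (pvR2 graph X Y r c) (fun j k => Iff.rfl)
    have hR2good : pvRgood (pvUnion (parent.insert (pvIdx Y (r, c) : Int)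
        (pvIdx Y (r, c) : Int)) (pvIdx Y (r, c) : Int) (pvAL graph Y r c))
        (pvR2 graph X Y r c) :=
      pvJoin_rgood hkeys2 hR1good pvR1_refl_iC (pvR1_refl_aL hr hc)
    have hcontI2 : (pvUnion (parent.insert (pvIdx Y (r, c) : Int) (pvIdx Y (r, c) : Int))
        (pvIdx Y (r, c) : Int) (pvAL graph Y r c)).contains (pvIdx Y (r, c) : Int) = true := by
      rw [pvContains_congr hkeys2]
      exact hcontI
    have hcontAU2 : (pvUnion (parent.insert (pvIdx Y (r, c) : Int) (pvIdx Y (r, c) : Int))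
        (pvIdx Y (r, c) : Int) (pvAL graph Y r c)).contains (pvAU graph Y r c) = true := by
      rw [pvContains_congr hkeys2]
      unfold pvAU
      by_cases hgu : 0 < r ∧ pvCell graph ((r - 1 : ℕ) : Int) (c : Int) = some '.'
      · rw [if_pos hgu]
        rw [PySem.Dict.contains_iff_mem_keys, hkeys1]
        refine List.mem_append.mpr (Or.inl ?_)
        exact mem_pvKeysSpec.mpr ⟨(r - 1, c), rfl,
          mem_pvScan.mpr (Or.inl ⟨Nat.sub_lt hgu.1 Nat.one_pos, hc⟩), hgu.2⟩
      · rw [if_neg hgu]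
        exact hcontI
    -- turn the conditional up union into the uniform one
    have hp3eq : (if 0 < (r : Int) ∧ pvCell graph ((r : Int) - 1) (c : Int) = some '.' then
        pvUnion (pvUnion (parent.insert (pvIdx Y (r, c) : Int) (pvIdx Y (r, c) : Int))
          (pvIdx Y (r, c) : Int) (pvAL graph Y r c))
          (pvIdx Y (r, c) : Int) (((r : Int) - 1) * y + (c : Int))
      else pvUnion (parent.insert (pvIdx Y (r, c) : Int) (pvIdx Y (r, c) : Int))
        (pvIdx Y (r, c) : Int) (pvAL graph Y r c)) =
        pvUnion (pvUnion (parent.insert (pvIdx Y (r, c) : Int) (pvIdx Y (r, c) : Int))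
          (pvIdx Y (r, c) : Int) (pvAL graph Y r c))
          (pvIdx Y (r, c) : Int) (pvAU graph Y r c) := by
      by_cases hgu : 0 < r ∧ pvCell graph ((r - 1 : ℕ) : Int) (c : Int) = some '.'
      · have hguInt : 0 < (r : Int) ∧ pvCell graph ((r : Int) - 1) (c : Int) = some '.' := by
          refine ⟨by exact_mod_cast hgu.1, ?_⟩
          rw [show ((r : Int) - 1) = ((r - 1 : ℕ) : Int) by omega]
          exact hgu.2
        rw [if_pos hguInt, huC hgu.1]
        unfold pvAU
        rw [if_pos hgu]
      · have hguInt : ¬ (0 < (r : Int) ∧ pvCell graph ((r : Int) - 1) (c : Int) = some '.') := by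
          rintro ⟨h1, h2⟩
          refine hgu ⟨by exact_mod_cast h1, ?_⟩
          rw [show ((r - 1 : ℕ) : Int) = ((r : Int) - 1) by omega]
          exact h2
        rw [if_neg hguInt]
        unfold pvAU
        rw [if_neg hgu, pvUnion_self]
    obtain ⟨hUF3, hkeys3⟩ := pvUnion_spec hUF2 hR2good hcontI2 hcontAU2
      (pvR3 graph X Y r c) (fun j k => Iff.rfl)
    have hconv : (let i := (r : Int) * y + (c : Int);
        let p1 := parent.insert i i;
        let p2 := if 0 < (c : Int) ∧ pvCell graph (r : Int) ((c : Int) - 1) = some '.' then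
            pvUnion p1 i ((r : Int) * y + ((c : Int) - 1)) else p1;
        if 0 < (r : Int) ∧ pvCell graph ((r : Int) - 1) (c : Int) = some '.' then
            pvUnion p2 i (((r : Int) - 1) * y + (c : Int)) else p2) =
        pvUnion (pvUnion (parent.insert (pvIdx Y (r, c) : Int) (pvIdx Y (r, c) : Int))
          (pvIdx Y (r, c) : Int) (pvAL graph Y r c))
          (pvIdx Y (r, c) : Int) (pvAU graph Y r c) := by
      show (if 0 < (r : Int) ∧ pvCell graph ((r : Int) - 1) (c : Int) = some '.' then
          pvUnion
            (if 0 < (c : Int) ∧ pvCell graph (r : Int) ((c : Int) - 1) = some '.' then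
              pvUnion (parent.insert ((r : Int) * y + (c : Int)) ((r : Int) * y + (c : Int)))
                ((r : Int) * y + (c : Int)) ((r : Int) * y + ((c : Int) - 1))
            else parent.insert ((r : Int) * y + (c : Int)) ((r : Int) * y + (c : Int)))
            ((r : Int) * y + (c : Int)) (((r : Int) - 1) * y + (c : Int))
        else
          (if 0 < (c : Int) ∧ pvCell graph (r : Int) ((c : Int) - 1) = some '.' then
            pvUnion (parent.insert ((r : Int) * y + (c : Int)) ((r : Int) * y + (c : Int)))
              ((r : Int) * y + (c : Int)) ((r : Int) * y + ((c : Int) - 1))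
          else parent.insert ((r : Int) * y + (c : Int)) ((r : Int) * y + (c : Int)))) = _
      rw [hiC, hp2eq]
      exact hp3eq
    rw [hconv]
    constructor
    · rw [hkeys3, hkeys2, hkeys1, pvKeysSpec_succ_dot hdotC]
    · exact pvUFinv_congr (pvR3_iff hr hc hdotC) hUF3

-- ## B-side: composing the scan loops

lemma pvInnerB (graph : List String) (x y : Int) (X Y : ℕ)
    (hx : (X : Int) = x) (hy : (Y : Int) = y) (r : ℕ) (hr : r < X) :
    ∀ (n c0 : ℕ) (parent : PySem.Dict Int Int), c0 + n = Y →
      parent.keys = pvKeysSpec graph Y r c0 →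
      pvUFinv parent (pvRscan graph X Y r c0) →
      ((PySem.List.pyRange (c0 : Int) y 1).foldl (fun (parent : PySem.Dict Int Int) c =>
        if pvCell graph (r : Int) c = some '.' then
          let i := (r : Int) * y + c
          let p1 := parent.insert i i
          let p2 := if 0 < c ∧ pvCell graph (r : Int) (c - 1) = some '.' then
              pvUnion p1 i ((r : Int) * y + (c - 1)) else p1
          if 0 < (r : Int) ∧ pvCell graph ((r : Int) - 1) c = some '.' then
              pvUnion p2 i (((r : Int) - 1) * y + c) else p2
        else parent) parent).keys = pvKeysSpec graph Y r Y ∧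
      pvUFinv ((PySem.List.pyRange (c0 : Int) y 1).foldl (fun (parent : PySem.Dict Int Int) c =>
        if pvCell graph (r : Int) c = some '.' then
          let i := (r : Int) * y + c
          let p1 := parent.insert i i
          let p2 := if 0 < c ∧ pvCell graph (r : Int) (c - 1) = some '.' then
              pvUnion p1 i ((r : Int) * y + (c - 1)) else p1
          if 0 < (r : Int) ∧ pvCell graph ((r : Int) - 1) c = some '.' then
              pvUnion p2 i (((r : Int) - 1) * y + c) else p2
        else parent) parent) (pvRscan graph X Y r Y) := by
  intro n
  induction n with
  | zero =>
    intro c0 parent hc0 hkeys hUF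
    have hnil : PySem.List.pyRange (c0 : Int) y 1 = [] :=
      PySem.List.pyRange_one_eq_nil (by omega)
    rw [hnil, List.foldl_nil]
    have : c0 = Y := by omega
    subst this
    exact ⟨hkeys, hUF⟩
  | succ n ih =>
    intro c0 parent hc0 hkeys hUF
    have hc : c0 < Y := by omega
    have hcons : PySem.List.pyRange (c0 : Int) y 1 =
        (c0 : Int) :: PySem.List.pyRange ((c0 : Int) + 1) y 1 :=
      PySem.List.pyRange_one_cons (by omega)
    rw [hcons, List.foldl_cons]
    have hstep := pvBCellStep graph x y X Y hx hy hr hc hkeys hUF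
    have hcast : ((c0 : Int) + 1) = ((c0 + 1 : ℕ) : Int) := by push_cast; ring
    rw [hcast]
    exact ih (c0 + 1) _ (by omega) hstep.1 hstep.2

lemma pvOuterB (graph : List String) (x y : Int) (X Y : ℕ)
    (hx : (X : Int) = x) (hy : (Y : Int) = y) :
    ∀ (m r0 : ℕ) (parent : PySem.Dict Int Int), r0 + m = X →
      parent.keys = pvKeysSpec graph Y r0 0 →
      pvUFinv parent (pvRscan graph X Y r0 0) →
      ((PySem.List.pyRange (r0 : Int) x 1).foldl (fun (parent : PySem.Dict Int Int) r =>
        (PySem.List.pyRange 0 y 1).foldl (fun (parent : PySem.Dict Int Int) c =>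
          if pvCell graph r c = some '.' then
            let i := r * y + c
            let p1 := parent.insert i i
            let p2 := if 0 < c ∧ pvCell graph r (c - 1) = some '.' then
                pvUnion p1 i (r * y + (c - 1)) else p1
            if 0 < r ∧ pvCell graph (r - 1) c = some '.' then
                pvUnion p2 i ((r - 1) * y + c) else p2
          else parent) parent) parent).keys = pvKeysSpec graph Y X 0 ∧
      pvUFinv ((PySem.List.pyRange (r0 : Int) x 1).foldl (fun (parent : PySem.Dict Int Int) r =>
        (PySem.List.pyRange 0 y 1).foldl (fun (parent : PySem.Dict Int Int) c =>
          if pvCell graph r c = some '.' then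
            let i := r * y + c
            let p1 := parent.insert i i
            let p2 := if 0 < c ∧ pvCell graph r (c - 1) = some '.' then
                pvUnion p1 i (r * y + (c - 1)) else p1
            if 0 < r ∧ pvCell graph (r - 1) c = some '.' then
                pvUnion p2 i ((r - 1) * y + c) else p2
          else parent) parent) parent) (pvRscan graph X Y X 0) := by
  intro m
  induction m with
  | zero =>
    intro r0 parent hr0 hkeys hUF
    have hnil : PySem.List.pyRange (r0 : Int) x 1 = [] :=
      PySem.List.pyRange_one_eq_nil (by omega)
    rw [hnil, List.foldl_nil]
    have : r0 = X := by omega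
    subst this
    exact ⟨hkeys, hUF⟩
  | succ m ih =>
    intro r0 parent hr0 hkeys hUF
    have hr : r0 < X := by omega
    have hcons : PySem.List.pyRange (r0 : Int) x 1 =
        (r0 : Int) :: PySem.List.pyRange ((r0 : Int) + 1) x 1 :=
      PySem.List.pyRange_one_cons (by omega)
    rw [hcons, List.foldl_cons]
    have h0 : (0 : Int) = ((0 : ℕ) : Int) := by norm_num
    rw [h0]
    obtain ⟨hk1, hu1⟩ := pvInnerB graph x y X Y hx hy r0 hr Y 0 parent (by omega) hkeys hUF
    have hk2 := hk1.trans (pvKeysSpec_row (graph := graph)).symm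
    have hu2 := pvUFinv_congr (fun j k => (pvRscan_row_iff j k).symm) hu1
    have hcast : ((r0 : Int) + 1) = ((r0 + 1 : ℕ) : Int) := by push_cast; ring
    rw [hcast]
    exact ih (r0 + 1) _ (by omega) hk2 hu2

lemma pvEmptyInit (graph : List String) (X Y : ℕ) :
    (PySem.Dict.empty : PySem.Dict Int Int).keys = pvKeysSpec graph Y 0 0 ∧
    pvUFinv (PySem.Dict.empty : PySem.Dict Int Int) (pvRscan graph X Y 0 0) := by
  constructor
  · have h1 : pvScan Y 0 0 = [] := by simp [pvScan]
    unfold pvKeysSpec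
    rw [h1]
    simp
  · refine ⟨by simp, ?_, ?_⟩
    · intro k v hget
      rw [PySem.Dict.get?_empty] at hget
      cases hget
    · intro k hk
      rw [PySem.Dict.contains_empty] at hk
      cases hk

-- a key is its own parent iff its cell is the scan-minimum of its room
lemma pvRootMin (graph : List String) (X Y : ℕ) {P : PySem.Dict Int Int}
    (hPk : P.keys = pvKeysSpec graph Y X 0)
    (hPu : pvUFinv P (pvRscan graph X Y X 0))
    {q : ℕ × ℕ} (hinb : pvInb X Y q) (hdot : pvDot graph q) :
    (P.get? (pvIdx Y q : Int) = some (pvIdx Y q : Int)) ↔ pvIsMin graph X Y q := by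
  obtain ⟨hnd, hK2, hroot⟩ := hPu
  have hch := pvUFinv_chain ⟨hnd, hK2, hroot⟩
  have hcont : P.contains (pvIdx Y q : Int) = true := by
    rw [PySem.Dict.contains_iff_mem_keys, hPk]
    exact mem_pvKeysSpec.mpr ⟨q, rfl, mem_pvScan.mpr (Or.inl ⟨hinb.1, hinb.2⟩), hdot⟩
  have h0 : (0 : Int) ≤ (pvIdx Y q : Int) := by positivity
  obtain ⟨hg, hcρ, h0ρ, hleρ⟩ := pvRoot_spec hch hcont h0
  constructor
  · intro hget
    have hrfix : pvRoot P (pvIdx Y q : Int) = (pvIdx Y q : Int) :=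
      pvFind_fix hget (by omega)
    refine ⟨hinb, hdot, ?_⟩
    intro q' hconn
    by_cases heq : q' = q
    · subst heq
      exact le_refl _
    · rcases pvConn_props hconn with h | ⟨_, _, hq'i, hq'd⟩
      · exact absurd h.symm heq
      · have hR : pvRscan graph X Y X 0 (pvIdx Y q' : Int) (pvIdx Y q : Int) :=
          (pvRscan_final_iff _ _).mpr ⟨q', q, rfl, rfl, ⟨hq'i, hq'd⟩, ⟨hinb, hdot⟩,
            pvConn_symm hconn⟩
        have hle := (hroot _ hcont).2 _ hR
        rw [hrfix] at hle
        exact_mod_cast hle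
  · rintro ⟨_, _, hmin⟩
    obtain ⟨p0, q0, he1, he2, hp0, hq0, hconn⟩ :=
      (pvRscan_final_iff (X := X) (Y := Y) _ _).mp (hroot _ hcont).1
    have hq0q : q0 = q := pvIdx_inj hq0.1.2 hinb.2 (by omega)
    rw [hq0q] at hconn
    have hge : (pvIdx Y q : Int) ≤ pvRoot P (pvIdx Y q : Int) := by
      rw [he1]
      exact_mod_cast hmin p0 (pvConn_symm hconn)
    have hre : pvRoot P (pvIdx Y q : Int) = (pvIdx Y q : Int) := by omega
    rw [hre] at hg
    exact hg

-- B's return value, for non-negative x and y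
lemma pvB_eq (graph : List String) (x y : Int) (X Y : ℕ)
    (hx : (X : Int) = x) (hy : (Y : Int) = y) :
    count_rooms_2d_visited_alt graph x y =
      (((pvScan Y X 0).countP (pvIsMinB graph X Y) : ℕ) : Int) := by
  unfold count_rooms_2d_visited_alt
  obtain ⟨hKe, hUe⟩ := pvEmptyInit graph X Y
  have houter := pvOuterB graph x y X Y hx hy X 0 PySem.Dict.empty (by omega) hKe hUe
  have houter' : ((PySem.List.pyRange 0 x 1).foldl (fun (parent : PySem.Dict Int Int) r =>
      (PySem.List.pyRange 0 y 1).foldl (fun (parent : PySem.Dict Int Int) c =>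
        if pvCell graph r c = some '.' then
          let i := r * y + c
          let p1 := parent.insert i i
          let p2 := if 0 < c ∧ pvCell graph r (c - 1) = some '.' then
              pvUnion p1 i (r * y + (c - 1)) else p1
          if 0 < r ∧ pvCell graph (r - 1) c = some '.' then
              pvUnion p2 i ((r - 1) * y + c) else p2
        else parent) parent) PySem.Dict.empty).keys = pvKeysSpec graph Y X 0 ∧
      pvUFinv ((PySem.List.pyRange 0 x 1).foldl (fun (parent : PySem.Dict Int Int) r =>
      (PySem.List.pyRange 0 y 1).foldl (fun (parent : PySem.Dict Int Int) c =>
        if pvCell graph r c = some '.' then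
          let i := r * y + c
          let p1 := parent.insert i i
          let p2 := if 0 < c ∧ pvCell graph r (c - 1) = some '.' then
              pvUnion p1 i (r * y + (c - 1)) else p1
          if 0 < r ∧ pvCell graph (r - 1) c = some '.' then
              pvUnion p2 i ((r - 1) * y + c) else p2
        else parent) parent) PySem.Dict.empty) (pvRscan graph X Y X 0) := houter
  set P := (PySem.List.pyRange 0 x 1).foldl (fun (parent : PySem.Dict Int Int) r =>
      (PySem.List.pyRange 0 y 1).foldl (fun (parent : PySem.Dict Int Int) c =>
        if pvCell graph r c = some '.' then
          let i := r * y + c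
          let p1 := parent.insert i i
          let p2 := if 0 < c ∧ pvCell graph r (c - 1) = some '.' then
              pvUnion p1 i (r * y + (c - 1)) else p1
          if 0 < r ∧ pvCell graph (r - 1) c = some '.' then
              pvUnion p2 i ((r - 1) * y + c) else p2
        else parent) parent) PySem.Dict.empty with hP
  obtain ⟨hPk, hPu⟩ := houter'
  show P.keys.foldl (fun acc k => if P.get? k = some k then acc + 1 else acc) 0 = _
  rw [PySem.List.foldl_ite_add_one (fun k => P.get? k = some k) P.keys 0]
  rw [zero_add, hPk]
  unfold pvKeysSpec
  rw [List.countP_map]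
  congr 1
  have hstep1 : ∀ a ∈ (pvScan Y X 0).filter
      (fun p => pvCell graph (p.1 : Int) (p.2 : Int) == some '.'),
      ((fun k => decide (P.get? k = some k)) ∘ (fun p : ℕ × ℕ => (pvIdx Y p : Int))) a =
        pvIsMinB graph X Y a := by
    intro a ha
    rw [List.mem_filter] at ha
    obtain ⟨hmem, hdotb⟩ := ha
    have hdot : pvDot graph a := beq_iff_eq.mp hdotb
    have hinb : pvInb X Y a := by
      rw [mem_pvScan] at hmem
      unfold pvInb
      omega
    simp only [Function.comp]
    rw [pvIsMinB]
    exact decide_eq_decide.mpr (pvRootMin graph X Y hPk hPu hinb hdot)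
  rw [List.countP_congr (fun a ha => by rw [hstep1 a ha])]
  rw [List.countP_filter]
  apply List.countP_congr
  intro a _
  cases hm : pvIsMinB graph X Y a
  · simp
  · have hdot : pvDot graph a := (pvIsMinB_iff.mp hm).2.1
    have hb : (pvCell graph (a.1 : Int) (a.2 : Int) == some '.') = true := beq_iff_eq.mpr hdot
    simp [hb]

-- degenerate sizes: empty loops on both sides
lemma pvA_deg (graph : List String) (x y : Int) (h : x ≤ 0 ∨ y ≤ 0) :
    count_rooms_2d_visited graph x y = 0 := by
  unfold count_rooms_2d_visited
  rcases h with h | h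
  · rw [PySem.List.pyRange_one_eq_nil (a := 0) (b := x) (by omega)]
    simp
  · rw [PySem.List.pyRange_one_eq_nil (a := 0) (b := y) (by omega)]
    simp only [List.foldl_nil, List.map_nil]
    rw [PySem.List.foldl_ignore]

lemma pvB_deg (graph : List String) (x y : Int) (h : x ≤ 0 ∨ y ≤ 0) :
    count_rooms_2d_visited_alt graph x y = 0 := by
  unfold count_rooms_2d_visited_alt
  rcases h with h | h
  · rw [PySem.List.pyRange_one_eq_nil (a := 0) (b := x) (by omega)]
    simp
  · rw [PySem.List.pyRange_one_eq_nil (a := 0) (b := y) (by omega)]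
    simp only [List.foldl_nil]
    rw [PySem.List.foldl_ignore]
    simp

-- ===== VERDICT (by name: the statement is the Claim_ definition above) =====
theorem count_rooms_2d_visited_spec : Claim_equal_count_rooms_2d_visited := by
  intro graph x y _ _
  unfold Spec_count_rooms_2d_visited
  by_cases hdeg : x ≤ 0 ∨ y ≤ 0
  · rw [pvA_deg graph x y hdeg, pvB_deg graph x y hdeg]
  · simp only [not_or, not_le] at hdeg
    have hx : ((x.toNat : ℕ) : Int) = x := by omega
    have hy : ((y.toNat : ℕ) : Int) = y := by omega
    rw [pvA_eq graph x y x.toNat y.toNat hx hy, pvB_eq graph x y x.toNat y.toNat hx hy]
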